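-- pv_equiv track=rewrite | github.com/S-Christensen/cartographersStudy | scoringCards.py | shoresideExpanse
-- ===== SOURCE A (Python) =====
-- def dfs(grid, row, col, visited, terrain_type):
--     stack = [(row, col)]
--     cluster = []
--
--     while stack:
--         r, c = stack.pop()
--         if (r, c) not in visited and grid[r][c] == terrain_type:
--             visited.add((r, c))
--             cluster.append((r, c))
--             for dr, dc in [(1, 0), (-1, 0), (0, 1), (0, -1)]:
--                 nr, nc = r + dr, c + dc
--                 if 0 <= nr < len(grid) and 0 <= nc < len(grid[0]):
--                     stack.append((nr, nc))
--     return cluster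
--
-- def shoresideExpanse(grid):
--     visited = set()
--     farm_clusters = []
--     water_clusters = []
--
--     for r in range(len(grid)):
--         for c in range(len(grid[0])):
--             if (r, c) not in visited:
--                 if grid[r][c] == "farm":
--                     cluster = dfs(grid, r, c, visited, "farm")
--                     farm_clusters.append(cluster)
--                 elif grid[r][c] == "water":
--                     cluster = dfs(grid, r, c, visited, "water")
--                     water_clusters.append(cluster)
--
--     def is_isolated(cluster, target):
--         for r, c in cluster:
--             for dr, dc in [(1,0), (-1,0), (0,1), (0,-1)]:
--                 nr, nc = r + dr, c + dc
--                 if not (0 <= nr < len(grid) and 0 <= nc < len(grid[0])):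
--                     return False
--                 if grid[nr][nc] == target:
--                     return False
--         return True
--
--     count = 0
--     for cluster in farm_clusters:
--         if is_isolated(cluster, "water"):
--             count += 1
--     for cluster in water_clusters:
--         if is_isolated(cluster, "farm"):
--             count += 1
--
--     return count * 3
-- ===== SOURCE B (Python) =====
-- def shoresideExpanse(grid):
--     rows = len(grid)
--     cols = len(grid[0]) if grid else 0
--
--     # weighted quick-find union-find: every cell keeps a direct label to its
--     # cluster root; unions relabel the smaller cluster wholesale.
--     label = {}
--     members = {}
--     for r in range(rows):
--         for c in range(cols):
--             if grid[r][c] in ("farm", "water"):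
--                 label[(r, c)] = (r, c)
--                 members[(r, c)] = [(r, c)]
--
--     for (r, c) in list(label):
--         for (nr, nc) in ((r + 1, c), (r, c + 1)):
--             if (nr, nc) in label and grid[nr][nc] == grid[r][c]:
--                 ra, rb = label[(r, c)], label[(nr, nc)]
--                 if ra != rb:
--                     if len(members[ra]) < len(members[rb]):
--                         ra, rb = rb, ra
--                     moved = members.pop(rb)
--                     for cell in moved:
--                         label[cell] = ra
--                     members[ra].extend(moved)
--
--     count = 0
--     for root, cells in members.items():
--         other = "farm" if grid[root[0]][root[1]] == "water" else "water"
--         isolated = True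
--         for (cr, cc) in cells:
--             for (nr, nc) in ((cr + 1, cc), (cr - 1, cc), (cr, cc + 1), (cr, cc - 1)):
--                 if not (0 <= nr < rows and 0 <= nc < cols) or grid[nr][nc] == other:
--                     isolated = False
--                     break
--             if not isolated:
--                 break
--         if isolated:
--             count += 1
--     return count * 3
-- ===== Notes on version B (the rewrite author's own statement) =====
-- stated objective: alternative
-- what changed: Replaces A's per-cluster explicit-stack DFS flood fill (with a shared visited set and deferred isolation counting) by a weighted quick-find union-find: every farm/water cell starts as its own labelled root, one pass over right/down edges merges same-terrain neighbours by relabelling the smaller cluster, and the resulting root->members map is then scanned with A's isolation test.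
import Mathlib
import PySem

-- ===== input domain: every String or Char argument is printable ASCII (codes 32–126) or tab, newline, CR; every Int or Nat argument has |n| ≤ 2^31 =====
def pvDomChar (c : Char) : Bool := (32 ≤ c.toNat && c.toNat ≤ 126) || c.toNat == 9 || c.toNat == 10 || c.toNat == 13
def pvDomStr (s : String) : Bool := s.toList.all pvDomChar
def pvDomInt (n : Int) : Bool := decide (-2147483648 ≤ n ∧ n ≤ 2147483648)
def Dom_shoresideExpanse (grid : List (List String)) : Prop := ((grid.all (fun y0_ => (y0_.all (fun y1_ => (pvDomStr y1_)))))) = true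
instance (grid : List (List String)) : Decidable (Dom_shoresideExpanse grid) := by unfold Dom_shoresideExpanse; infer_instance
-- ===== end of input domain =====

-- B replaces A's stack-DFS flood fill per cluster by a weighted quick-find union-find
-- (direct cell→root labels, unions over right/down edges relabel the smaller cluster)
-- (objective: alternative; equal return value proved below).

-- shared cell primitives both Pythons contain verbatim: grid[r][c] (total form, exact
-- under Pre_), the 4-neighbour list, and the bounds test 0 <= r < nrows and 0 <= c < ncols
def cellAt (grid : List (List String)) (r c : Int) : String :=
  PySem.List.pyGetD (PySem.List.pyGetD grid r []) c ""

def nbrs4 (r c : Int) : List (Int × Int) := [(r + 1, c), (r - 1, c), (r, c + 1), (r, c - 1)]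

def inb (nrows ncols : Int) (p : Int × Int) : Bool :=
  decide (0 ≤ p.1 ∧ p.1 < nrows ∧ 0 ≤ p.2 ∧ p.2 < ncols)

-- cells inside the grid bounds, as a Finset (used only for A's dfs termination measure)
def univCells (nrows ncols : Int) : Finset (Int × Int) :=
  ((PySem.List.pyRange 0 nrows 1).flatMap fun r =>
    (PySem.List.pyRange 0 ncols 1).map fun c => (r, c)).toFinset

theorem mem_univCells_of_inb {nrows ncols : Int} {p : Int × Int} (h : inb nrows ncols p = true) :
    p ∈ univCells nrows ncols := by
  simp only [inb, decide_eq_true_eq] at h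
  simp only [univCells, List.mem_toFinset, List.mem_flatMap, List.mem_map,
    PySem.List.mem_pyRange_one]
  exact ⟨p.1, ⟨h.1, h.2.1⟩, p.2, ⟨h.2.2.1, h.2.2.2⟩, rfl⟩

-- ===== PORT A =====
-- the while-stack loop of dfs; stack's head is Python's stack top (append/pop at the list head)
def dfsGo (grid : List (List String)) (terrain : String) (nrows ncols : Int) :
    List (Int × Int) → PySem.Set (Int × Int) → List (Int × Int) →
    List (Int × Int) × PySem.Set (Int × Int)
  | [], visited, cluster => (cluster, visited)
  | p :: rest, visited, cluster =>
      if h : p ∉ visited ∧ cellAt grid p.1 p.2 = terrain then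
        dfsGo grid terrain nrows ncols
          (((nbrs4 p.1 p.2).filter (inb nrows ncols)).reverse ++ rest)
          (PySem.Set.add visited p) (cluster ++ [p])
      else
        dfsGo grid terrain nrows ncols rest visited cluster
  termination_by stack visited _ =>
    (((univCells nrows ncols ∪ stack.toFinset) \ visited.toFinset).card, stack.length)
  decreasing_by
  · apply Prod.Lex.left
    apply Finset.card_lt_card
    rw [Finset.ssubset_iff_of_subset]
    · exact ⟨p, by
        simp only [Finset.mem_sdiff, Finset.mem_union, List.mem_toFinset, List.mem_cons,
          PySem.Set.mem_add, not_or]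
        tauto⟩
    · intro x hx
      simp only [Finset.mem_sdiff, Finset.mem_union, List.mem_toFinset, List.mem_append,
        List.mem_reverse, List.mem_filter, List.mem_cons, PySem.Set.mem_add, not_or] at *
      rcases hx with ⟨hx1, hx2⟩
      refine ⟨?_, hx2.1⟩
      rcases hx1 with hu | hin
      · exact Or.inl hu
      · rcases hin with ⟨_, h2⟩ | hr
        · exact Or.inl (mem_univCells_of_inb h2)
        · exact Or.inr (Or.inr hr)
  · have hsub : (univCells nrows ncols ∪ rest.toFinset) \ visited.toFinset ⊆
        (univCells nrows ncols ∪ (p :: rest).toFinset) \ visited.toFinset := by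
      apply Finset.sdiff_subset_sdiff _ (Finset.Subset.refl _)
      apply Finset.union_subset_union (Finset.Subset.refl _)
      intro x hx
      simp only [List.mem_toFinset, List.mem_cons] at *
      exact Or.inr hx
    rcases lt_or_eq_of_le (Finset.card_le_card hsub) with hlt | heq
    · exact Prod.Lex.left _ _ hlt
    · rw [heq]
      exact Prod.Lex.right _ (by simp)

def dfs (grid : List (List String)) (row col : Int) (visited : PySem.Set (Int × Int))
    (terrain : String) : List (Int × Int) × PySem.Set (Int × Int) :=
  dfsGo grid terrain grid.length (PySem.List.pyGetD grid 0 []).length [(row, col)] visited []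

-- is_isolated: the two early 'return False' tests combine into one all-check per neighbour
def isIsolated (grid : List (List String)) (nrows ncols : Int) (cluster : List (Int × Int))
    (target : String) : Bool :=
  cluster.all fun p =>
    (nbrs4 p.1 p.2).all fun q =>
      inb nrows ncols q && decide (cellAt grid q.1 q.2 ≠ target)

def shoresideExpanse (grid : List (List String)) : Int :=
  let nrows : Int := grid.length
  let ncols : Int := (PySem.List.pyGetD grid 0 []).length
  let st :=
    (PySem.List.pyRange 0 nrows 1).foldl (fun st r =>
      (PySem.List.pyRange 0 ncols 1).foldl (fun st c =>
        if (r, c) ∉ st.1 then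
          if cellAt grid r c = "farm" then
            let res := dfs grid r c st.1 "farm"
            (res.2, st.2.1 ++ [res.1], st.2.2)
          else if cellAt grid r c = "water" then
            let res := dfs grid r c st.1 "water"
            (res.2, st.2.1, st.2.2 ++ [res.1])
          else st
        else st) st)
      (([] : PySem.Set (Int × Int)), ([] : List (List (Int × Int))), ([] : List (List (Int × Int))))
  let count : Int :=
    st.2.1.foldl (fun cnt cl => if isIsolated grid nrows ncols cl "water" then cnt + 1 else cnt) 0
  let count : Int :=
    st.2.2.foldl (fun cnt cl => if isIsolated grid nrows ncols cl "farm" then cnt + 1 else cnt) count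
  count * 3

-- ===== PORT B =====
-- the two forward (right/down) neighbours whose undirected edges the union pass scans
def edgeNbrs (r c : Int) : List (Int × Int) := [(r + 1, c), (r, c + 1)]

-- one conditional union: if the forward neighbour q is labelled and carries p's terrain,
-- relabel the smaller of the two clusters wholesale (weighted quick-find)
def unionEdge (grid : List (List String))
    (st : PySem.Dict (Int × Int) (Int × Int) × PySem.Dict (Int × Int) (List (Int × Int)))
    (p q : Int × Int) :
    PySem.Dict (Int × Int) (Int × Int) × PySem.Dict (Int × Int) (List (Int × Int)) :=
  if st.1.contains q = true ∧ cellAt grid q.1 q.2 = cellAt grid p.1 p.2 then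
    let ra := st.1.getD p p
    let rb := st.1.getD q q
    if ra = rb then st
    else
      let pr := if (st.2.getD ra []).length < (st.2.getD rb []).length then (rb, ra) else (ra, rb)
      let moved := st.2.getD pr.2 []
      (moved.foldl (fun d cell => d.insert cell pr.1) st.1,
       (st.2.erase pr.2).modify pr.1 [] (fun l => l ++ moved))
  else st

-- every farm/water cell starts as its own root with a singleton member list
def bInit (grid : List (List String)) (rows cols : Int) :
    PySem.Dict (Int × Int) (Int × Int) × PySem.Dict (Int × Int) (List (Int × Int)) :=
  (PySem.List.pyRange 0 rows 1).foldl (fun st r =>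
    (PySem.List.pyRange 0 cols 1).foldl (fun st c =>
      if cellAt grid r c = "farm" ∨ cellAt grid r c = "water" then
        (st.1.insert (r, c) (r, c), st.2.insert (r, c) [(r, c)])
      else st) st)
    ((PySem.Dict.empty : PySem.Dict (Int × Int) (Int × Int)),
     (PySem.Dict.empty : PySem.Dict (Int × Int) (List (Int × Int))))

def shoresideExpanse_alt (grid : List (List String)) : Int :=
  let rows : Int := grid.length
  let cols : Int := if grid = [] then 0 else (PySem.List.pyGetD grid 0 []).length
  let init := bInit grid rows cols
  let st := init.1.keys.foldl (fun st p =>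
      (edgeNbrs p.1 p.2).foldl (fun st q => unionEdge grid st p q) st) init
  let count : Int := st.2.items.foldl (fun cnt it =>
      let other := if cellAt grid it.1.1 it.1.2 = "water" then "farm" else "water"
      if it.2.all (fun p => (nbrs4 p.1 p.2).all fun q =>
          inb rows cols q && decide (cellAt grid q.1 q.2 ≠ other)) then cnt + 1 else cnt) 0
  count * 3

-- ===== PRECONDITION & SPEC =====
-- Pre_ excludes exactly the grids on which the Python A raises IndexError: those with a row
-- shorter than row 0 (every in-bounds cell grid[r][c] with c < len(grid[0]) must exist).
def Pre_shoresideExpanse (grid : List (List String)) : Prop :=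
  ∀ row ∈ grid, (grid.headD []).length ≤ row.length
instance (grid : List (List String)) : Decidable (Pre_shoresideExpanse grid) := by
  unfold Pre_shoresideExpanse; infer_instance

def pvWitness_shoresideExpanse : List (List String) := [["farm", "water"], ["sand", "farm"]]

def Spec_shoresideExpanse (grid : List (List String)) (out : Int) : Prop := out = shoresideExpanse_alt grid
instance (grid : List (List String)) (out : Int) : Decidable (Spec_shoresideExpanse grid out) := by unfold Spec_shoresideExpanse; infer_instance

-- ===== CLAIM (what is proved, stated in full; the proofs are below) =====
def Claim_equal_shoresideExpanse : Prop := ∀ (grid : List (List String)), Dom_shoresideExpanse grid → Pre_shoresideExpanse grid → Spec_shoresideExpanse grid (shoresideExpanse grid)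

-- ===== LEMMAS AND PROOFS =====

-- one step between orthogonally adjacent cells whose target is in bounds and carries terrain t
def StepR (grid : List (List String)) (nrows ncols : Int) (t : String) (p q : Int × Int) : Prop :=
  q ∈ nbrs4 p.1 p.2 ∧ inb nrows ncols q = true ∧ cellAt grid q.1 q.2 = t

def ReachR (grid : List (List String)) (nrows ncols : Int) (t : String) (p q : Int × Int) : Prop :=
  Relation.ReflTransGen (StepR grid nrows ncols t) p q

theorem mem_nbrs4_symm {p q : Int × Int} (h : q ∈ nbrs4 p.1 p.2) : p ∈ nbrs4 q.1 q.2 := by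
  obtain ⟨p1, p2⟩ := p
  obtain ⟨q1, q2⟩ := q
  simp only [nbrs4, List.mem_cons, List.not_mem_nil, or_false, Prod.mk.injEq] at *
  omega

theorem reach_inb {grid nrows ncols t} {p q : Int × Int}
    (hp : inb nrows ncols p = true) (h : ReachR grid nrows ncols t p q) :
    inb nrows ncols q = true := by
  induction h with
  | refl => exact hp
  | tail _ hst _ => exact hst.2.1

theorem reach_cell {grid nrows ncols t} {p q : Int × Int}
    (hp : cellAt grid p.1 p.2 = t) (h : ReachR grid nrows ncols t p q) :
    cellAt grid q.1 q.2 = t := by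
  induction h with
  | refl => exact hp
  | tail _ hst _ => exact hst.2.2

theorem reach_symm {grid nrows ncols t} {p q : Int × Int}
    (hpi : inb nrows ncols p = true) (hpc : cellAt grid p.1 p.2 = t)
    (h : ReachR grid nrows ncols t p q) : ReachR grid nrows ncols t q p := by
  induction h with
  | refl => exact Relation.ReflTransGen.refl
  | tail hab hst ih =>
    rename_i b c
    have hbi : inb nrows ncols b = true := reach_inb hpi hab
    have hbc : cellAt grid b.1 b.2 = t := reach_cell hpc hab
    exact Relation.ReflTransGen.head ⟨mem_nbrs4_symm hst.1, hbi, hbc⟩ ih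

-- equal boolean 'all' over lists with the same members
theorem all_eq_of_mem_iff {α : Type} {l1 l2 : List α} (f : α → Bool)
    (h : ∀ x, x ∈ l1 ↔ x ∈ l2) : l1.all f = l2.all f := by
  rcases hb : l2.all f with _ | _
  · rw [List.all_eq_false] at *
    obtain ⟨x, hx, hfx⟩ := hb
    exact ⟨x, (h x).mpr hx, hfx⟩
  · rw [List.all_eq_true] at *
    exact fun x hx => hb x ((h x).mp hx)

-- pointwise-equal predicates give equal 'all'
theorem all_congr_mem {α : Type} {l : List α} {f g : α → Bool}
    (h : ∀ x ∈ l, f x = g x) : l.all f = l.all g := by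
  induction l with
  | nil => rfl
  | cons a l ih =>
    simp only [List.all_cons, h a (List.mem_cons_self), ih (fun x hx => h x (List.mem_cons_of_mem _ hx))]

-- abbreviations for the two grid dimensions A and B both use
def nR (grid : List (List String)) : Int := grid.length
def nC (grid : List (List String)) : Int := (PySem.List.pyGetD grid 0 []).length

-- the cells both programs cluster: in-bounds and carrying farm or water
def Good (grid : List (List String)) (p : Int × Int) : Prop :=
  inb (nR grid) (nC grid) p = true ∧
  (cellAt grid p.1 p.2 = "farm" ∨ cellAt grid p.1 p.2 = "water")

theorem good_of_reach {grid : List (List String)} {p x : Int × Int}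
    (hp : Good grid p) (h : ReachR grid (nR grid) (nC grid) (cellAt grid p.1 p.2) p x) :
    Good grid x := by
  refine ⟨reach_inb hp.1 h, ?_⟩
  rw [reach_cell rfl h]
  exact hp.2

-- a cluster = the connected same-terrain component of some good seed
def IsCluster (grid : List (List String)) (cl : List (Int × Int)) : Prop :=
  ∃ p, Good grid p ∧ ∀ x, (x ∈ cl ↔ ReachR grid (nR grid) (nC grid) (cellAt grid p.1 p.2) p x)

def Disj (a b : List (Int × Int)) : Prop := ∀ x, x ∈ a → x ∉ b

-- the uniform isolation test: every neighbour of every cell is in bounds and does not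
-- carry the cell's opposite terrain (equals A's per-cluster is_isolated on a cluster)
def oppOf (t : String) : String := if t = "water" then "farm" else "water"

def PIso (grid : List (List String)) (cl : List (Int × Int)) : Bool :=
  cl.all fun p =>
    (nbrs4 p.1 p.2).all fun q =>
      inb (nR grid) (nC grid) q && decide (cellAt grid q.1 q.2 ≠ oppOf (cellAt grid p.1 p.2))

theorem piso_eq_isIsolated {grid : List (List String)} {cl : List (Int × Int)} {t : String}
    (h : ∀ p ∈ cl, cellAt grid p.1 p.2 = t) :
    PIso grid cl = isIsolated grid (nR grid) (nC grid) cl (oppOf t) := by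
  unfold PIso isIsolated
  exact all_congr_mem (fun p hp => by rw [h p hp])

theorem piso_respects_mem {grid : List (List String)} {cl cl' : List (Int × Int)}
    (h : ∀ x, x ∈ cl ↔ x ∈ cl') : PIso grid cl = PIso grid cl' := by
  exact all_eq_of_mem_iff _ h

-- two clusters sharing a cell have the same members
theorem cluster_mem_iff {grid : List (List String)} {cl cl' : List (Int × Int)}
    (hc : IsCluster grid cl) (hc' : IsCluster grid cl')
    {y : Int × Int} (hy : y ∈ cl) (hy' : y ∈ cl') : ∀ x, x ∈ cl ↔ x ∈ cl' := by
  obtain ⟨p, hp, hcl⟩ := hc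
  obtain ⟨q, hq, hcl'⟩ := hc'
  have hqy : ReachR grid (nR grid) (nC grid) (cellAt grid q.1 q.2) q y := (hcl' y).mp hy'
  have hpy : ReachR grid (nR grid) (nC grid) (cellAt grid p.1 p.2) p y := (hcl y).mp hy
  have hcellq : cellAt grid y.1 y.2 = cellAt grid q.1 q.2 := reach_cell rfl hqy
  have hcellp : cellAt grid y.1 y.2 = cellAt grid p.1 p.2 := reach_cell rfl hpy
  have hsame : cellAt grid q.1 q.2 = cellAt grid p.1 p.2 := by rw [← hcellq, hcellp]
  have hyq : ReachR grid (nR grid) (nC grid) (cellAt grid q.1 q.2) y q :=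
    reach_symm hq.1 rfl hqy
  have hyp : ReachR grid (nR grid) (nC grid) (cellAt grid p.1 p.2) y p :=
    reach_symm hp.1 rfl hpy
  intro x
  rw [hcl x, hcl' x]
  constructor
  · intro hx
    exact Relation.ReflTransGen.trans hqy (Relation.ReflTransGen.trans (hsame ▸ hyp)
      (hsame ▸ hx))
  · intro hx
    exact Relation.ReflTransGen.trans hpy (Relation.ReflTransGen.trans (hsame ▸ hyq)
      (hsame.symm ▸ hx : ReachR grid (nR grid) (nC grid) (cellAt grid p.1 p.2) q x))

-- counting a membership-invariant predicate over any two disjoint cluster covers of the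
-- same cells gives the same count
theorem count_transfer (grid : List (List String)) (P : List (Int × Int) → Bool)
    (hP : ∀ cl cl', (∀ x, x ∈ cl ↔ x ∈ cl') → P cl = P cl') :
    ∀ (L1 L2 : List (List (Int × Int))),
    (∀ cl ∈ L1, IsCluster grid cl) → (∀ cl ∈ L2, IsCluster grid cl) →
    L1.Pairwise Disj → L2.Pairwise Disj →
    (∀ x, (∃ cl ∈ L1, x ∈ cl) ↔ (∃ cl ∈ L2, x ∈ cl)) →
    L1.countP P = L2.countP P := by
  intro L1
  induction L1 with
  | nil =>
    intro L2 _ hC2 _ _ hcov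
    cases L2 with
    | nil => rfl
    | cons cl l2 =>
      obtain ⟨p, hp, hcl⟩ := hC2 cl List.mem_cons_self
      have hpcl : p ∈ cl := (hcl p).mpr Relation.ReflTransGen.refl
      obtain ⟨c, hc, _⟩ := (hcov p).mpr ⟨cl, List.mem_cons_self, hpcl⟩
      exact absurd hc List.not_mem_nil
  | cons cl L1' ih =>
    intro L2 hC1 hC2 hP1 hP2 hcov
    obtain ⟨p, hp, hclmem⟩ := hC1 cl List.mem_cons_self
    have hpcl : p ∈ cl := (hclmem p).mpr Relation.ReflTransGen.refl
    obtain ⟨cl', hcl'mem, hpcl'⟩ := (hcov p).mp ⟨cl, List.mem_cons_self, hpcl⟩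
    have hmem_iff : ∀ x, x ∈ cl ↔ x ∈ cl' :=
      cluster_mem_iff (hC1 cl List.mem_cons_self) (hC2 cl' hcl'mem) hpcl hpcl'
    have hperm : L2.Perm (cl' :: L2.erase cl') := List.perm_cons_erase hcl'mem
    have hP2' : (cl' :: L2.erase cl').Pairwise Disj :=
      (List.Perm.pairwise_iff (fun h x hx hxa => h x hxa hx) hperm).mp hP2
    rw [List.Perm.countP_eq P hperm]
    simp only [List.countP_cons]
    have hih : L1'.countP P = (L2.erase cl').countP P := by
      apply ih (L2.erase cl')
      · exact fun d hd => hC1 d (List.mem_cons_of_mem _ hd)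
      · exact fun d hd => hC2 d (List.erase_sublist.mem hd)
      · exact (List.pairwise_cons.mp hP1).2
      · exact List.Pairwise.sublist List.erase_sublist hP2
      · intro x
        constructor
        · rintro ⟨d, hd, hxd⟩
          have hxc : x ∉ cl := fun hxc => (List.pairwise_cons.mp hP1).1 d hd x hxc hxd
          obtain ⟨e, he, hxe⟩ := (hcov x).mp ⟨d, List.mem_cons_of_mem _ hd, hxd⟩
          have hne : e ≠ cl' := fun heq => hxc ((hmem_iff x).mpr (heq ▸ hxe))
          exact ⟨e, (List.mem_erase_of_ne hne).mpr he, hxe⟩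
        · rintro ⟨e, he, hxe⟩
          obtain ⟨d, hd, hxd⟩ := (hcov x).mpr ⟨e, List.erase_sublist.mem he, hxe⟩
          rcases List.mem_cons.mp hd with hdcl | hd'
          · subst hdcl
            exact absurd hxe ((List.pairwise_cons.mp hP2').1 e he x ((hmem_iff x).mp hxd))
          · exact ⟨d, hd', hxd⟩
    rw [hih, hP cl cl' hmem_iff]

-- ---------- side A: the row-major DFS scan produces a disjoint cluster cover ----------

-- A's DFS loop: invariant-carrying specification
theorem dfsGo_spec (grid : List (List String)) (t : String) (nrows ncols : Int)
    (s : Int × Int) (V0 : PySem.Set (Int × Int))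
    (hs_cell : cellAt grid s.1 s.2 = t) (hV0 : ∀ x ∈ V0, ¬ ReachR grid nrows ncols t s x) :
    ∀ (stack : List (Int × Int)) (visited : PySem.Set (Int × Int)) (cluster : List (Int × Int)),
    (∀ x, x ∈ visited ↔ x ∈ V0 ∨ x ∈ cluster) →
    (∀ x ∈ cluster, ReachR grid nrows ncols t s x) →
    (∀ x ∈ stack, x = s ∨ ∃ p ∈ cluster, x ∈ nbrs4 p.1 p.2 ∧ inb nrows ncols x = true) →
    (∀ p ∈ cluster, ∀ q, StepR grid nrows ncols t p q → q ∈ V0 ∨ q ∈ cluster ∨ q ∈ stack) →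
    (s ∈ cluster ∨ s ∈ stack) →
    ∀ x, (x ∈ (dfsGo grid t nrows ncols stack visited cluster).1 ↔
            ReachR grid nrows ncols t s x) ∧
         (x ∈ (dfsGo grid t nrows ncols stack visited cluster).2 ↔
            (x ∈ V0 ∨ ReachR grid nrows ncols t s x)) := by
  intro stack visited cluster
  fun_induction dfsGo grid t nrows ncols stack visited cluster with
  | case1 visited cluster =>
    intro h1 h2 _h3 h4 h5 x
    have hsc : s ∈ cluster := by
      rcases h5 with h | h
      · exact h
      · exact absurd h List.not_mem_nil
    have hcl : ∀ y, ReachR grid nrows ncols t s y → y ∈ cluster := by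
      intro y hr
      induction hr with
      | refl => exact hsc
      | tail hab hst ih2 =>
        rename_i b c
        rcases h4 b ih2 c hst with h | h | h
        · exact absurd (Relation.ReflTransGen.tail hab hst) (hV0 c h)
        · exact h
        · exact absurd h List.not_mem_nil
    refine ⟨⟨fun hx => h2 x hx, fun hr => hcl x hr⟩, ?_⟩
    rw [h1 x]
    constructor
    · rintro (h | h)
      · exact Or.inl h
      · exact Or.inr (h2 x h)
    · rintro (h | h)
      · exact Or.inl h
      · exact Or.inr (hcl x h)
  | case2 p rest visited cluster h ih =>
    intro h1 h2 h3 h4 h5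
    have hsp : ReachR grid nrows ncols t s p := by
      rcases h3 p (List.mem_cons_self) with hp | ⟨pr, hpr, hnb, hinb⟩
      · exact hp ▸ Relation.ReflTransGen.refl
      · exact Relation.ReflTransGen.tail (h2 pr hpr) ⟨hnb, hinb, h.2⟩
    apply ih
    · intro x
      rw [PySem.Set.mem_add, h1 x, List.mem_append, List.mem_singleton]
      tauto
    · intro x hx
      rcases List.mem_append.mp hx with hx | hx
      · exact h2 x hx
      · rw [List.mem_singleton] at hx
        exact hx ▸ hsp
    · intro x hx
      rcases List.mem_append.mp hx with hx | hx
      · rw [List.mem_reverse, List.mem_filter] at hx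
        exact Or.inr ⟨p, List.mem_append.mpr (Or.inr (List.mem_singleton.mpr rfl)), hx.1, hx.2⟩
      · rcases h3 x (List.mem_cons_of_mem _ hx) with hx' | ⟨pr, hpr, hnb, hinb⟩
        · exact Or.inl hx'
        · exact Or.inr ⟨pr, List.mem_append.mpr (Or.inl hpr), hnb, hinb⟩
    · intro pr hpr q hst
      rcases List.mem_append.mp hpr with hpr | hpr
      · rcases h4 pr hpr q hst with hq | hq | hq
        · exact Or.inl hq
        · exact Or.inr (Or.inl (List.mem_append.mpr (Or.inl hq)))
        · rcases List.mem_cons.mp hq with hq | hq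
          · exact Or.inr (Or.inl (List.mem_append.mpr (Or.inr (List.mem_singleton.mpr hq))))
          · exact Or.inr (Or.inr (List.mem_append.mpr (Or.inr hq)))
      · rw [List.mem_singleton] at hpr
        subst hpr
        refine Or.inr (Or.inr (List.mem_append.mpr (Or.inl ?_)))
        rw [List.mem_reverse, List.mem_filter]
        exact ⟨hst.1, hst.2.1⟩
    · rcases h5 with hs | hs
      · exact Or.inl (List.mem_append.mpr (Or.inl hs))
      · rcases List.mem_cons.mp hs with hs | hs
        · exact Or.inl (List.mem_append.mpr (Or.inr (List.mem_singleton.mpr hs)))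
        · exact Or.inr (List.mem_append.mpr (Or.inr hs))
  | case3 p rest visited cluster h ih =>
    intro h1 h2 h3 h4 h5
    rw [Decidable.not_and_iff_or_not, Decidable.not_not] at h
    apply ih
    · exact h1
    · exact h2
    · exact fun x hx => h3 x (List.mem_cons_of_mem _ hx)
    · intro pr hpr q hst
      rcases h4 pr hpr q hst with hq | hq | hq
      · exact Or.inl hq
      · exact Or.inr (Or.inl hq)
      · rcases List.mem_cons.mp hq with hq | hq
        · subst hq
          rcases h with hv | hcell
          · rcases (h1 q).mp hv with hq' | hq'
            · exact Or.inl hq'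
            · exact Or.inr (Or.inl hq')
          · exact absurd hst.2.2 hcell
        · exact Or.inr (Or.inr hq)
    · rcases h5 with hs | hs
      · exact Or.inl hs
      · rcases List.mem_cons.mp hs with hs | hs
        · subst hs
          rcases h with hv | hcell
          · rcases (h1 s).mp hv with hs' | hs'
            · exact absurd Relation.ReflTransGen.refl (hV0 s hs')
            · exact Or.inl hs'
          · exact absurd hs_cell hcell
        · exact Or.inr hs

-- specification of A's dfs helper
theorem dfs_spec (grid : List (List String)) (r c : Int) (visited : PySem.Set (Int × Int))
    (t : String) (hcell : cellAt grid r c = t)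
    (hdisj : ∀ x ∈ visited, ¬ ReachR grid (nR grid) (nC grid) t (r, c) x) :
    ∀ x, (x ∈ (dfs grid r c visited t).1 ↔ ReachR grid (nR grid) (nC grid) t (r, c) x) ∧
         (x ∈ (dfs grid r c visited t).2 ↔
            (x ∈ visited ∨ ReachR grid (nR grid) (nC grid) t (r, c) x)) := by
  apply dfsGo_spec grid t (nR grid) (nC grid) (r, c) visited hcell hdisj
  · intro x
    simp
  · intro x hx
    exact absurd hx List.not_mem_nil
  · intro x hx
    rw [List.mem_singleton] at hx
    exact Or.inl hx
  · intro p hp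
    exact absurd hp List.not_mem_nil
  · exact Or.inr (List.mem_singleton.mpr rfl)

-- the visited set is always a union of whole clusters
def ClosedV (grid : List (List String)) (V : PySem.Set (Int × Int)) : Prop :=
  ∀ q ∈ V, inb (nR grid) (nC grid) q = true ∧
    (cellAt grid q.1 q.2 = "farm" ∨ cellAt grid q.1 q.2 = "water") ∧
    ∀ x, ReachR grid (nR grid) (nC grid) (cellAt grid q.1 q.2) q x → x ∈ V

theorem disjoint_of_closed (grid : List (List String)) (V : PySem.Set (Int × Int))
    (hCl : ClosedV grid V) {s : Int × Int} (hsV : s ∉ V)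
    (hsi : inb (nR grid) (nC grid) s = true) {t : String}
    (hsc : cellAt grid s.1 s.2 = t) :
    ∀ x ∈ V, ¬ ReachR grid (nR grid) (nC grid) t s x := by
  intro x hx hr
  have hcx : cellAt grid x.1 x.2 = t := reach_cell hsc hr
  have hback := (hCl x hx).2.2 s (hcx ▸ reach_symm hsi hsc hr)
  exact hsV hback

-- the scan of A, named
def scanA (grid : List (List String)) :
    PySem.Set (Int × Int) × List (List (Int × Int)) × List (List (Int × Int)) :=
  (PySem.List.pyRange 0 grid.length 1).foldl (fun st r =>
    (PySem.List.pyRange 0 (PySem.List.pyGetD grid 0 []).length 1).foldl (fun st c =>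
      if (r, c) ∉ st.1 then
        if cellAt grid r c = "farm" then
          let res := dfs grid r c st.1 "farm"
          (res.2, st.2.1 ++ [res.1], st.2.2)
        else if cellAt grid r c = "water" then
          let res := dfs grid r c st.1 "water"
          (res.2, st.2.1, st.2.2 ++ [res.1])
        else st
      else st) st) ([], [], [])

-- A's scan invariant: clusters are components of good seeds, pairwise disjoint,
-- and together exactly the visited set
def AInv (grid : List (List String))
    (st : PySem.Set (Int × Int) × List (List (Int × Int)) × List (List (Int × Int))) : Prop :=
  (∀ x, x ∈ st.1 ↔ ∃ cl ∈ st.2.1 ++ st.2.2, x ∈ cl) ∧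
  (∀ cl ∈ st.2.1, ∃ p, Good grid p ∧ cellAt grid p.1 p.2 = "farm" ∧
      ∀ x, (x ∈ cl ↔ ReachR grid (nR grid) (nC grid) "farm" p x)) ∧
  (∀ cl ∈ st.2.2, ∃ p, Good grid p ∧ cellAt grid p.1 p.2 = "water" ∧
      ∀ x, (x ∈ cl ↔ ReachR grid (nR grid) (nC grid) "water" p x)) ∧
  (st.2.1 ++ st.2.2).Pairwise Disj

theorem closedV_of_AInv {grid : List (List String)} {st}
    (h : AInv grid st) : ClosedV grid st.1 := by
  intro q hq
  obtain ⟨cl, hclmem, hqcl⟩ := (h.1 q).mp hq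
  have hcl : ∃ p t, (t = "farm" ∨ t = "water") ∧ Good grid p ∧ cellAt grid p.1 p.2 = t ∧
      ∀ x, (x ∈ cl ↔ ReachR grid (nR grid) (nC grid) t p x) := by
    rcases List.mem_append.mp hclmem with hf | hw
    · obtain ⟨p, hp, hpt, hiff⟩ := h.2.1 cl hf
      exact ⟨p, "farm", Or.inl rfl, hp, hpt, hiff⟩
    · obtain ⟨p, hp, hpt, hiff⟩ := h.2.2.1 cl hw
      exact ⟨p, "water", Or.inr rfl, hp, hpt, hiff⟩
  obtain ⟨p, t, ht, hp, hpt, hiff⟩ := hcl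
  have hreach := (hiff q).mp hqcl
  have hcellq : cellAt grid q.1 q.2 = t := reach_cell hpt hreach
  refine ⟨reach_inb hp.1 hreach, by rw [hcellq]; exact ht, ?_⟩
  intro x hx
  rw [hcellq] at hx
  have : x ∈ cl := (hiff x).mpr (Relation.ReflTransGen.trans hreach hx)
  exact (h.1 x).mpr ⟨cl, hclmem, this⟩

-- one scanned cell preserves the invariant, grows visited, and visits the cell when good
theorem stepA_inv (grid : List (List String)) (r c : Int)
    (hr : 0 ≤ r ∧ r < nR grid) (hc : 0 ≤ c ∧ c < nC grid)
    (st : PySem.Set (Int × Int) × List (List (Int × Int)) × List (List (Int × Int)))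
    (hInv : AInv grid st) :
    AInv grid (if (r, c) ∉ st.1 then
        if cellAt grid r c = "farm" then
          ((dfs grid r c st.1 "farm").2, st.2.1 ++ [(dfs grid r c st.1 "farm").1], st.2.2)
        else if cellAt grid r c = "water" then
          ((dfs grid r c st.1 "water").2, st.2.1, st.2.2 ++ [(dfs grid r c st.1 "water").1])
        else st
      else st) ∧
    (∀ x ∈ st.1, x ∈ (if (r, c) ∉ st.1 then
        if cellAt grid r c = "farm" then
          ((dfs grid r c st.1 "farm").2, st.2.1 ++ [(dfs grid r c st.1 "farm").1], st.2.2)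
        else if cellAt grid r c = "water" then
          ((dfs grid r c st.1 "water").2, st.2.1, st.2.2 ++ [(dfs grid r c st.1 "water").1])
        else st
      else st).1) ∧
    (Good grid (r, c) → (r, c) ∈ (if (r, c) ∉ st.1 then
        if cellAt grid r c = "farm" then
          ((dfs grid r c st.1 "farm").2, st.2.1 ++ [(dfs grid r c st.1 "farm").1], st.2.2)
        else if cellAt grid r c = "water" then
          ((dfs grid r c st.1 "water").2, st.2.1, st.2.2 ++ [(dfs grid r c st.1 "water").1])
        else st
      else st).1) := by
  have hinb : inb (nR grid) (nC grid) (r, c) = true := by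
    simp only [inb, decide_eq_true_eq]
    exact ⟨hr.1, hr.2, hc.1, hc.2⟩
  by_cases hv : (r, c) ∈ st.1
  · rw [if_neg (not_not_intro hv)]
    exact ⟨hInv, fun x hx => hx, fun _ => hv⟩
  · rw [if_pos hv]
    by_cases hf : cellAt grid r c = "farm"
    · rw [if_pos hf]
      have hdisj := disjoint_of_closed grid st.1 (closedV_of_AInv hInv) hv hinb hf
      have hd := dfs_spec grid r c st.1 "farm" hf hdisj
      have hnewdisj : ∀ cl0 ∈ st.2.1 ++ st.2.2,
          Disj cl0 (dfs grid r c st.1 "farm").1 ∧ Disj (dfs grid r c st.1 "farm").1 cl0 := by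
        intro cl0 hcl0
        constructor
        · intro x hx hxn
          exact hdisj x ((hInv.1 x).mpr ⟨cl0, hcl0, hx⟩) ((hd x).1.mp hxn)
        · intro x hxn hx
          exact hdisj x ((hInv.1 x).mpr ⟨cl0, hcl0, hx⟩) ((hd x).1.mp hxn)
      refine ⟨⟨?_, ?_, ?_, ?_⟩, ?_, ?_⟩
      · intro x
        rw [(hd x).2, hInv.1 x]
        simp only [List.mem_append, List.mem_singleton]
        constructor
        · rintro (⟨cl, hcl, hx⟩ | hreach)
          · rcases hcl with hcl | hcl
            · exact ⟨cl, Or.inl (Or.inl hcl), hx⟩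
            · exact ⟨cl, Or.inr hcl, hx⟩
          · exact ⟨(dfs grid r c st.1 "farm").1, Or.inl (Or.inr rfl), (hd x).1.mpr hreach⟩
        · rintro ⟨cl, hcl, hx⟩
          rcases hcl with (hcl | hcl) | hcl
          · exact Or.inl ⟨cl, Or.inl hcl, hx⟩
          · exact Or.inr ((hd x).1.mp (hcl ▸ hx))
          · exact Or.inl ⟨cl, Or.inr hcl, hx⟩
      · intro cl hcl
        rcases List.mem_append.mp hcl with hcl | hcl
        · exact hInv.2.1 cl hcl
        · rw [List.mem_singleton] at hcl
          subst hcl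
          exact ⟨(r, c), ⟨hinb, Or.inl hf⟩, hf, fun x => (hd x).1⟩
      · exact hInv.2.2.1
      · have hperm : ((st.2.1 ++ [(dfs grid r c st.1 "farm").1]) ++ st.2.2).Perm
            ((st.2.1 ++ st.2.2) ++ [(dfs grid r c st.1 "farm").1]) := by
          rw [List.append_assoc, List.append_assoc]
          exact List.Perm.append_left _ List.perm_append_comm
        show List.Pairwise Disj ((st.2.1 ++ [(dfs grid r c st.1 "farm").1]) ++ st.2.2)
        rw [List.Perm.pairwise_iff (fun h x hx hxa => h x hxa hx) hperm]
        rw [List.pairwise_append]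
        exact ⟨hInv.2.2.2, List.pairwise_singleton _ _,
          fun a ha b hb => (List.mem_singleton.mp hb) ▸ (hnewdisj a ha).1⟩
      · exact fun x hx => (hd x).2.mpr (Or.inl hx)
      · exact fun _ => (hd (r, c)).2.mpr (Or.inr Relation.ReflTransGen.refl)
    · rw [if_neg hf]
      by_cases hw : cellAt grid r c = "water"
      · rw [if_pos hw]
        have hdisj := disjoint_of_closed grid st.1 (closedV_of_AInv hInv) hv hinb hw
        have hd := dfs_spec grid r c st.1 "water" hw hdisj
        have hnewdisj : ∀ cl0 ∈ st.2.1 ++ st.2.2,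
            Disj cl0 (dfs grid r c st.1 "water").1 ∧ Disj (dfs grid r c st.1 "water").1 cl0 := by
          intro cl0 hcl0
          constructor
          · intro x hx hxn
            exact hdisj x ((hInv.1 x).mpr ⟨cl0, hcl0, hx⟩) ((hd x).1.mp hxn)
          · intro x hxn hx
            exact hdisj x ((hInv.1 x).mpr ⟨cl0, hcl0, hx⟩) ((hd x).1.mp hxn)
        refine ⟨⟨?_, ?_, ?_, ?_⟩, ?_, ?_⟩
        · intro x
          rw [(hd x).2, hInv.1 x]
          simp only [List.mem_append, List.mem_singleton]
          constructor
          · rintro (⟨cl, hcl, hx⟩ | hreach)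
            · rcases hcl with hcl | hcl
              · exact ⟨cl, Or.inl hcl, hx⟩
              · exact ⟨cl, Or.inr (Or.inl hcl), hx⟩
            · exact ⟨(dfs grid r c st.1 "water").1, Or.inr (Or.inr rfl), (hd x).1.mpr hreach⟩
          · rintro ⟨cl, hcl, hx⟩
            rcases hcl with hcl | (hcl | hcl)
            · exact Or.inl ⟨cl, Or.inl hcl, hx⟩
            · exact Or.inl ⟨cl, Or.inr hcl, hx⟩
            · exact Or.inr ((hd x).1.mp (hcl ▸ hx))
        · exact hInv.2.1
        · intro cl hcl
          rcases List.mem_append.mp hcl with hcl | hcl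
          · exact hInv.2.2.1 cl hcl
          · rw [List.mem_singleton] at hcl
            subst hcl
            exact ⟨(r, c), ⟨hinb, Or.inr hw⟩, hw, fun x => (hd x).1⟩
        · show List.Pairwise Disj (st.2.1 ++ (st.2.2 ++ [(dfs grid r c st.1 "water").1]))
          rw [← List.append_assoc, List.pairwise_append]
          exact ⟨hInv.2.2.2, List.pairwise_singleton _ _,
            fun a ha b hb => (List.mem_singleton.mp hb) ▸ (hnewdisj a ha).1⟩
        · exact fun x hx => (hd x).2.mpr (Or.inl hx)
        · exact fun _ => (hd (r, c)).2.mpr (Or.inr Relation.ReflTransGen.refl)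
      · rw [if_neg hw]
        refine ⟨hInv, fun x hx => hx, fun hg => ?_⟩
        rcases hg.2 with h | h
        · exact absurd h hf
        · exact absurd h hw

-- the inner (column) fold: invariant, monotone visited, coverage of the scanned row
theorem innerA_inv (grid : List (List String)) (r : Int)
    (hr : 0 ≤ r ∧ r < nR grid) :
    ∀ (cs : List Int), (∀ c ∈ cs, 0 ≤ c ∧ c < nC grid) →
    ∀ st, AInv grid st →
    AInv grid (cs.foldl (fun st c =>
        if (r, c) ∉ st.1 then
          if cellAt grid r c = "farm" then
            let res := dfs grid r c st.1 "farm"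
            (res.2, st.2.1 ++ [res.1], st.2.2)
          else if cellAt grid r c = "water" then
            let res := dfs grid r c st.1 "water"
            (res.2, st.2.1, st.2.2 ++ [res.1])
          else st
        else st) st) ∧
    (∀ x ∈ st.1, x ∈ (cs.foldl (fun st c =>
        if (r, c) ∉ st.1 then
          if cellAt grid r c = "farm" then
            let res := dfs grid r c st.1 "farm"
            (res.2, st.2.1 ++ [res.1], st.2.2)
          else if cellAt grid r c = "water" then
            let res := dfs grid r c st.1 "water"
            (res.2, st.2.1, st.2.2 ++ [res.1])
          else st
        else st) st).1) ∧
    (∀ c ∈ cs, Good grid (r, c) → (r, c) ∈ (cs.foldl (fun st c =>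
        if (r, c) ∉ st.1 then
          if cellAt grid r c = "farm" then
            let res := dfs grid r c st.1 "farm"
            (res.2, st.2.1 ++ [res.1], st.2.2)
          else if cellAt grid r c = "water" then
            let res := dfs grid r c st.1 "water"
            (res.2, st.2.1, st.2.2 ++ [res.1])
          else st
        else st) st).1) := by
  intro cs
  induction cs with
  | nil => exact fun _ st h => ⟨h, fun x hx => hx, fun c hc => absurd hc List.not_mem_nil⟩
  | cons c cs ih =>
    intro hb st hInv
    simp only [List.foldl_cons]
    obtain ⟨h1, h2, h3⟩ := stepA_inv grid r c hr (hb c List.mem_cons_self) st hInv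
    obtain ⟨ih1, ih2, ih3⟩ := ih (fun c' hc' => hb c' (List.mem_cons_of_mem _ hc')) _ h1
    refine ⟨ih1, fun x hx => ih2 x (h2 x hx), ?_⟩
    intro c' hc' hg
    rcases List.mem_cons.mp hc' with hc' | hc'
    · subst hc'
      exact ih2 _ (h3 hg)
    · exact ih3 c' hc' hg

-- the outer (row) fold
theorem outerA_inv (grid : List (List String)) :
    ∀ (rs : List Int), (∀ r ∈ rs, 0 ≤ r ∧ r < nR grid) →
    ∀ st, AInv grid st →
    AInv grid (rs.foldl (fun st r =>
      (PySem.List.pyRange 0 (PySem.List.pyGetD grid 0 []).length 1).foldl (fun st c =>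
        if (r, c) ∉ st.1 then
          if cellAt grid r c = "farm" then
            let res := dfs grid r c st.1 "farm"
            (res.2, st.2.1 ++ [res.1], st.2.2)
          else if cellAt grid r c = "water" then
            let res := dfs grid r c st.1 "water"
            (res.2, st.2.1, st.2.2 ++ [res.1])
          else st
        else st) st) st) ∧
    (∀ x ∈ st.1, x ∈ (rs.foldl (fun st r =>
      (PySem.List.pyRange 0 (PySem.List.pyGetD grid 0 []).length 1).foldl (fun st c =>
        if (r, c) ∉ st.1 then
          if cellAt grid r c = "farm" then
            let res := dfs grid r c st.1 "farm"
            (res.2, st.2.1 ++ [res.1], st.2.2)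
          else if cellAt grid r c = "water" then
            let res := dfs grid r c st.1 "water"
            (res.2, st.2.1, st.2.2 ++ [res.1])
          else st
        else st) st) st).1) ∧
    (∀ r ∈ rs, ∀ c, 0 ≤ c → c < nC grid → Good grid (r, c) →
      (r, c) ∈ (rs.foldl (fun st r =>
      (PySem.List.pyRange 0 (PySem.List.pyGetD grid 0 []).length 1).foldl (fun st c =>
        if (r, c) ∉ st.1 then
          if cellAt grid r c = "farm" then
            let res := dfs grid r c st.1 "farm"
            (res.2, st.2.1 ++ [res.1], st.2.2)
          else if cellAt grid r c = "water" then
            let res := dfs grid r c st.1 "water"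
            (res.2, st.2.1, st.2.2 ++ [res.1])
          else st
        else st) st) st).1) := by
  intro rs
  induction rs with
  | nil => exact fun _ st h => ⟨h, fun x hx => hx, fun r hr => absurd hr List.not_mem_nil⟩
  | cons r rs ih =>
    intro hb st hInv
    simp only [List.foldl_cons]
    have hcs : ∀ c ∈ PySem.List.pyRange 0 (PySem.List.pyGetD grid 0 []).length 1,
        0 ≤ c ∧ c < nC grid := by
      intro c hc
      exact PySem.List.mem_pyRange_one.mp hc
    obtain ⟨h1, h2, h3⟩ := innerA_inv grid r (hb r List.mem_cons_self) _ hcs st hInv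
    obtain ⟨ih1, ih2, ih3⟩ := ih (fun r' hr' => hb r' (List.mem_cons_of_mem _ hr')) _ h1
    refine ⟨ih1, fun x hx => ih2 x (h2 x hx), ?_⟩
    intro r' hr' c hc0 hc1 hg
    rcases List.mem_cons.mp hr' with hr' | hr'
    · subst hr'
      refine ih2 _ (h3 c ?_ hg)
      exact PySem.List.mem_pyRange_one.mpr ⟨hc0, hc1⟩
    · exact ih3 r' hr' c hc0 hc1 hg

-- A's scan: invariant holds and every good cell is visited
theorem scanA_inv (grid : List (List String)) :
    AInv grid (scanA grid) ∧ ∀ p, Good grid p → p ∈ (scanA grid).1 := by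
  have h0 : AInv grid (([] : PySem.Set (Int × Int)), ([] : List (List (Int × Int))),
      ([] : List (List (Int × Int)))) := by
    refine ⟨fun x => ?_, fun cl hcl => absurd hcl List.not_mem_nil,
      fun cl hcl => absurd hcl List.not_mem_nil, List.Pairwise.nil⟩
    simp
  have hrs : ∀ r ∈ PySem.List.pyRange 0 grid.length 1, 0 ≤ r ∧ r < nR grid := by
    intro r hr
    exact PySem.List.mem_pyRange_one.mp hr
  obtain ⟨h1, _, h3⟩ := outerA_inv grid (PySem.List.pyRange 0 grid.length 1) hrs _ h0
  refine ⟨h1, fun p hg => ?_⟩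
  have hinb := hg.1
  simp only [inb, decide_eq_true_eq] at hinb
  have := h3 p.1 (PySem.List.mem_pyRange_one.mpr ⟨hinb.1, hinb.2.1⟩) p.2 hinb.2.2.1 hinb.2.2.2
  exact this hg

-- ---------- side B: weighted quick-find produces the same disjoint cluster cover ----------

-- lookups under the two dict operations B's union uses (erase; a fold of constant inserts)
theorem dict_get?_erase {κ ν : Type} [BEq κ] [LawfulBEq κ] [DecidableEq κ]
    (d : PySem.Dict κ ν) (k x : κ) :
    (d.erase k).get? x = if x = k then none else d.get? x := by
  obtain ⟨l⟩ := d
  simp only [PySem.Dict.erase, PySem.Dict.get?]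
  induction l with
  | nil => simp
  | cons a l ih =>
    rw [List.filter_cons]
    by_cases hak : a.1 = k
    · have h1 : (!(a.1 == k)) = false := by simp [hak]
      rw [h1]
      simp only [Bool.false_eq_true, if_false]
      rw [ih]
      by_cases hxk : x = k
      · simp [hxk]
      · rw [if_neg hxk, if_neg hxk]
        have h2 : (a.1 == x) = false := by
          simp only [beq_eq_false_iff_ne, ne_eq]
          exact fun h => hxk (by rw [← h, hak])
        rw [List.find?_cons_of_neg (h := by simp [h2])]
    · have h1 : (!(a.1 == k)) = true := by simp [hak]
      rw [h1]
      simp only [if_true]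
      by_cases hax : a.1 = x
      · have hxk : ¬ x = k := fun h => hak (by rw [hax, h])
        rw [if_neg hxk]
        rw [List.find?_cons_of_pos (h := by simp [hax]), List.find?_cons_of_pos (h := by simp [hax])]
      · have h2 : (a.1 == x) = false := by simp [hax]
        rw [List.find?_cons_of_neg (h := by simp [h2]), List.find?_cons_of_neg (h := by simp [h2])]
        exact ih

theorem dict_get?_foldl_insert {κ ν : Type} [BEq κ] [LawfulBEq κ] [DecidableEq κ]
    (v : ν) : ∀ (l : List κ) (d : PySem.Dict κ ν) (x : κ),
    (l.foldl (fun d c => d.insert c v) d).get? x = if x ∈ l then some v else d.get? x := by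
  intro l
  induction l with
  | nil => simp
  | cons c cs ih =>
    intro d x
    simp only [List.foldl_cons, ih, List.mem_cons]
    by_cases hx : x ∈ cs
    · simp [hx]
    · by_cases hxc : x = c
      · subst hxc
        simp [hx, PySem.Dict.get?_insert_self]
      · simp [hx, hxc, PySem.Dict.get?_insert_of_ne _ _ hxc]

-- the undirected union edges recorded so far, and their connectivity relation
def EdgeIn (grid : List (List String)) (done : List ((Int × Int) × (Int × Int)))
    (x y : Int × Int) : Prop :=
  ((x, y) ∈ done ∨ (y, x) ∈ done) ∧ Good grid x ∧ Good grid y ∧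
    cellAt grid y.1 y.2 = cellAt grid x.1 x.2 ∧ y ∈ nbrs4 x.1 x.2

def RelE (grid : List (List String)) (done : List ((Int × Int) × (Int × Int)))
    (x y : Int × Int) : Prop :=
  Relation.ReflTransGen (EdgeIn grid done) x y

theorem edgeIn_symm {grid done} {x y : Int × Int} (h : EdgeIn grid done x y) :
    EdgeIn grid done y x := by
  obtain ⟨hm, hx, hy, hc, hn⟩ := h
  exact ⟨hm.symm, hy, hx, hc.symm, mem_nbrs4_symm hn⟩

theorem relE_symm {grid done} {x y : Int × Int} (h : RelE grid done x y) :
    RelE grid done y x :=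
  Relation.ReflTransGen.symmetric (fun _ _ h => edgeIn_symm h) h

theorem relE_mono {grid} {done done' : List ((Int × Int) × (Int × Int))}
    (hsub : ∀ e ∈ done, e ∈ done') {x y : Int × Int} (h : RelE grid done x y) :
    RelE grid done' x y :=
  Relation.ReflTransGen.mono (fun _ _ hab => ⟨hab.1.imp (hsub _) (hsub _), hab.2⟩) h

theorem relE_nil {grid} {x y : Int × Int} : RelE grid [] x y ↔ x = y := by
  constructor
  · intro h
    induction h with
    | refl => rfl
    | tail _ hst _ => exact absurd hst.1 (by simp)
  · intro h
    exact h ▸ Relation.ReflTransGen.refl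

-- recording one admissible edge merges exactly the two incident classes
theorem relE_append_iff {grid done} {p q : Int × Int} (hgp : Good grid p) (hgq : Good grid q)
    (hcell : cellAt grid q.1 q.2 = cellAt grid p.1 p.2) (hnb : q ∈ nbrs4 p.1 p.2)
    (x y : Int × Int) :
    RelE grid (done ++ [(p, q)]) x y ↔
      RelE grid done x y ∨ (RelE grid done x p ∧ RelE grid done q y) ∨
        (RelE grid done x q ∧ RelE grid done p y) := by
  have hsub : ∀ e ∈ done, e ∈ done ++ [(p, q)] := fun e he => List.mem_append.mpr (Or.inl he)
  constructor
  · intro h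
    induction h with
    | refl => exact Or.inl Relation.ReflTransGen.refl
    | tail hab hst ih =>
      rename_i b c
      obtain ⟨hm, hgb, hgc, hcbc, hnbc⟩ := hst
      have hold : ((b, c) ∈ done ∨ (c, b) ∈ done) →
          (RelE grid done x c ∨ (RelE grid done x p ∧ RelE grid done q c) ∨
            (RelE grid done x q ∧ RelE grid done p c)) := fun hm' => by
        have hstep : EdgeIn grid done b c := ⟨hm', hgb, hgc, hcbc, hnbc⟩
        rcases ih with h1 | ⟨h2a, h2b⟩ | ⟨h3a, h3b⟩
        · exact Or.inl (h1.tail hstep)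
        · exact Or.inr (Or.inl ⟨h2a, h2b.tail hstep⟩)
        · exact Or.inr (Or.inr ⟨h3a, h3b.tail hstep⟩)
      rcases hm with hm | hm
      · rcases List.mem_append.mp hm with hd | hnew
        · exact hold (Or.inl hd)
        · simp only [List.mem_singleton, Prod.mk.injEq] at hnew
          obtain ⟨hbp, hcq⟩ := hnew
          subst hbp; subst hcq
          rcases ih with h1 | ⟨h2a, h2b⟩ | ⟨h3a, h3b⟩
          · exact Or.inr (Or.inl ⟨h1, Relation.ReflTransGen.refl⟩)
          · exact Or.inl (h2a.trans (relE_symm h2b))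
          · exact Or.inl h3a
      · rcases List.mem_append.mp hm with hd | hnew
        · exact hold (Or.inr hd)
        · simp only [List.mem_singleton, Prod.mk.injEq] at hnew
          obtain ⟨hcp, hbq⟩ := hnew
          subst hcp; subst hbq
          rcases ih with h1 | ⟨h2a, h2b⟩ | ⟨h3a, h3b⟩
          · exact Or.inr (Or.inr ⟨h1, Relation.ReflTransGen.refl⟩)
          · exact Or.inl h2a
          · exact Or.inl (h3a.trans (relE_symm h3b))
  · have hepq : EdgeIn grid (done ++ [(p, q)]) p q :=
      ⟨Or.inl (List.mem_append.mpr (Or.inr (List.mem_singleton.mpr rfl))), hgp, hgq, hcell, hnb⟩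
    rintro (h | ⟨h1, h2⟩ | ⟨h1, h2⟩)
    · exact relE_mono hsub h
    · exact ((relE_mono hsub h1).tail hepq).trans (relE_mono hsub h2)
    · exact ((relE_mono hsub h1).tail (edgeIn_symm hepq)).trans (relE_mono hsub h2)

-- recording an inadmissible edge changes nothing
theorem relE_append_of_not {grid done} {p q : Int × Int}
    (h : ¬ (Good grid q ∧ cellAt grid q.1 q.2 = cellAt grid p.1 p.2))
    (x y : Int × Int) :
    RelE grid (done ++ [(p, q)]) x y ↔ RelE grid done x y := by
  constructor
  · intro hr
    induction hr with
    | refl => exact Relation.ReflTransGen.refl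
    | tail hab hst ih =>
      rename_i b c
      obtain ⟨hm, hgb, hgc, hcbc, hnbc⟩ := hst
      have hm' : (b, c) ∈ done ∨ (c, b) ∈ done := by
        rcases hm with hm | hm
        · rcases List.mem_append.mp hm with hd | hnew
          · exact Or.inl hd
          · simp only [List.mem_singleton, Prod.mk.injEq] at hnew
            obtain ⟨hbp, hcq⟩ := hnew
            subst hbp; subst hcq
            exact absurd ⟨hgc, hcbc⟩ h
        · rcases List.mem_append.mp hm with hd | hnew
          · exact Or.inr hd
          · simp only [List.mem_singleton, Prod.mk.injEq] at hnew
            obtain ⟨hcp, hbq⟩ := hnew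
            subst hcp; subst hbq
            exact absurd ⟨hgb, hcbc.symm⟩ h
      exact ih.tail ⟨hm', hgb, hgc, hcbc, hnbc⟩
  · exact relE_mono (fun e he => List.mem_append.mpr (Or.inl he))

-- recording an edge between already-connected cells changes nothing
theorem relE_append_of_rel {grid done} {p q : Int × Int} (hgp : Good grid p) (hgq : Good grid q)
    (hcell : cellAt grid q.1 q.2 = cellAt grid p.1 p.2) (hnb : q ∈ nbrs4 p.1 p.2)
    (hpq : RelE grid done p q) (x y : Int × Int) :
    RelE grid (done ++ [(p, q)]) x y ↔ RelE grid done x y := by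
  rw [relE_append_iff hgp hgq hcell hnb]
  constructor
  · rintro (h | ⟨h1, h2⟩ | ⟨h1, h2⟩)
    · exact h
    · exact (h1.trans hpq).trans h2
    · exact (h1.trans (relE_symm hpq)).trans h2
  · exact Or.inl

-- characterization of the initialization pass: processed good cells map to themselves
def BH (grid : List (List String))
    (st : PySem.Dict (Int × Int) (Int × Int) × PySem.Dict (Int × Int) (List (Int × Int)))
    (S : Int × Int → Prop) : Prop :=
  ∀ x, (Good grid x ∧ S x → st.1.get? x = some x ∧ st.2.get? x = some [x]) ∧
       (¬ (Good grid x ∧ S x) → st.1.get? x = none ∧ st.2.get? x = none)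

theorem BH_iff {grid st} {S T : Int × Int → Prop}
    (h : ∀ x, Good grid x → (S x ↔ T x)) (hH : BH grid st S) : BH grid st T := by
  intro x
  constructor
  · intro ⟨hg, ht⟩
    exact (hH x).1 ⟨hg, (h x hg).mpr ht⟩
  · intro hn
    refine (hH x).2 (fun ⟨hg, hs⟩ => hn ⟨hg, (h x hg).mp hs⟩)

theorem bInit_inner (grid : List (List String)) (r : Int) (hr : 0 ≤ r ∧ r < nR grid) :
    ∀ (cs : List Int), (∀ c ∈ cs, 0 ≤ c ∧ c < nC grid) →
    ∀ st (S : Int × Int → Prop), BH grid st S →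
    BH grid (cs.foldl (fun st c =>
        if cellAt grid r c = "farm" ∨ cellAt grid r c = "water" then
          (st.1.insert (r, c) (r, c), st.2.insert (r, c) [(r, c)])
        else st) st)
      (fun x => S x ∨ (x.1 = r ∧ x.2 ∈ cs)) := by
  intro cs
  induction cs with
  | nil => exact fun _ st S h => BH_iff (fun x _ => by simp) h
  | cons c cs ih =>
    intro hb st S hH
    simp only [List.foldl_cons]
    have hstep : BH grid (if cellAt grid r c = "farm" ∨ cellAt grid r c = "water" then
        (st.1.insert (r, c) (r, c), st.2.insert (r, c) [(r, c)])
      else st) (fun x => S x ∨ x = (r, c)) := by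
      by_cases hcell : cellAt grid r c = "farm" ∨ cellAt grid r c = "water"
      · rw [if_pos hcell]
        have hgood : Good grid (r, c) := by
          refine ⟨?_, hcell⟩
          simp only [inb, decide_eq_true_eq]
          exact ⟨hr.1, hr.2, (hb c List.mem_cons_self).1, (hb c List.mem_cons_self).2⟩
        intro x
        constructor
        · rintro ⟨hg, hS | hS⟩
          · by_cases hx : x = (r, c)
            · subst hx
              exact ⟨PySem.Dict.get?_insert_self _ _ _, PySem.Dict.get?_insert_self _ _ _⟩
            · rw [PySem.Dict.get?_insert_of_ne _ _ hx, PySem.Dict.get?_insert_of_ne _ _ hx]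
              exact (hH x).1 ⟨hg, hS⟩
          · subst hS
            exact ⟨PySem.Dict.get?_insert_self _ _ _, PySem.Dict.get?_insert_self _ _ _⟩
        · intro hn
          have hx : x ≠ (r, c) := fun hx => hn (by subst hx; exact ⟨hgood, Or.inr rfl⟩)
          rw [PySem.Dict.get?_insert_of_ne _ _ hx, PySem.Dict.get?_insert_of_ne _ _ hx]
          exact (hH x).2 (fun ⟨hg, hs⟩ => hn ⟨hg, Or.inl hs⟩)
      · rw [if_neg hcell]
        refine BH_iff (fun x hg => ?_) hH
        constructor
        · exact Or.inl
        · rintro (h | h)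
          · exact h
          · subst h
            exact absurd hg.2 hcell
    have := ih (fun c' hc' => hb c' (List.mem_cons_of_mem _ hc')) _ _ hstep
    refine BH_iff (fun x _ => ?_) this
    simp only [List.mem_cons]
    constructor
    · rintro ((h | h) | ⟨h1, h2⟩)
      · exact Or.inl h
      · exact Or.inr ⟨congrArg Prod.fst h, Or.inl (congrArg Prod.snd h)⟩
      · exact Or.inr ⟨h1, Or.inr h2⟩
    · rintro (h | ⟨h1, h2 | h2⟩)
      · exact Or.inl (Or.inl h)
      · exact Or.inl (Or.inr (by obtain ⟨x1, x2⟩ := x; exact congrArg₂ Prod.mk h1 h2))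
      · exact Or.inr ⟨h1, h2⟩

theorem bInit_spec (grid : List (List String)) :
    ∀ x, (Good grid x → (bInit grid (nR grid) (nC grid)).1.get? x = some x ∧
            (bInit grid (nR grid) (nC grid)).2.get? x = some [x]) ∧
      (¬ Good grid x → (bInit grid (nR grid) (nC grid)).1.get? x = none ∧
            (bInit grid (nR grid) (nC grid)).2.get? x = none) := by
  have h0 : BH grid (PySem.Dict.empty, PySem.Dict.empty) (fun _ => False) := by
    intro x
    refine ⟨fun h => absurd h.2 not_false, fun _ => ⟨PySem.Dict.get?_empty _, PySem.Dict.get?_empty _⟩⟩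
  have grow : ∀ (rs : List Int), (∀ r ∈ rs, 0 ≤ r ∧ r < nR grid) →
      ∀ st (S : Int × Int → Prop), BH grid st S →
      BH grid (rs.foldl (fun st r =>
          (PySem.List.pyRange 0 (nC grid) 1).foldl (fun st c =>
            if cellAt grid r c = "farm" ∨ cellAt grid r c = "water" then
              (st.1.insert (r, c) (r, c), st.2.insert (r, c) [(r, c)])
            else st) st) st)
        (fun x => S x ∨ (x.1 ∈ rs ∧ x.2 ∈ PySem.List.pyRange 0 (nC grid) 1)) := by
    intro rs
    induction rs with
    | nil => exact fun _ st S h => BH_iff (fun x _ => by simp) h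
    | cons r rs ih =>
      intro hb st S hH
      simp only [List.foldl_cons]
      have hcs : ∀ c ∈ PySem.List.pyRange 0 (nC grid) 1, 0 ≤ c ∧ c < nC grid :=
        fun c hc => PySem.List.mem_pyRange_one.mp hc
      have h1 := bInit_inner grid r (hb r List.mem_cons_self) _ hcs st S hH
      have h2 := ih (fun r' hr' => hb r' (List.mem_cons_of_mem _ hr')) _ _ h1
      refine BH_iff (fun x _ => ?_) h2
      simp only [List.mem_cons]
      constructor
      · rintro ((h | ⟨h1', h2'⟩) | ⟨h1', h2'⟩)
        · exact Or.inl h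
        · exact Or.inr ⟨Or.inl h1', h2'⟩
        · exact Or.inr ⟨Or.inr h1', h2'⟩
      · rintro (h | ⟨h1' | h1', h2'⟩)
        · exact Or.inl (Or.inl h)
        · exact Or.inl (Or.inr ⟨h1', h2'⟩)
        · exact Or.inr ⟨h1', h2'⟩
  have hrs : ∀ r ∈ PySem.List.pyRange 0 (nR grid) 1, 0 ≤ r ∧ r < nR grid :=
    fun r hr => PySem.List.mem_pyRange_one.mp hr
  have hfin := grow (PySem.List.pyRange 0 (nR grid) 1) hrs _ _ h0
  intro x
  have hGS : Good grid x → (x.1 ∈ PySem.List.pyRange 0 (nR grid) 1 ∧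
      x.2 ∈ PySem.List.pyRange 0 (nC grid) 1) := by
    intro hg
    have := hg.1
    simp only [inb, decide_eq_true_eq] at this
    exact ⟨PySem.List.mem_pyRange_one.mpr ⟨this.1, this.2.1⟩,
      PySem.List.mem_pyRange_one.mpr ⟨this.2.2.1, this.2.2.2⟩⟩
  constructor
  · intro hg
    exact (hfin x).1 ⟨hg, Or.inr (hGS hg)⟩
  · intro hg
    exact (hfin x).2 (fun h => hg h.1)

-- the snapshot of label keys the union pass iterates over consists of good cells
theorem bInit_keys_good (grid : List (List String)) :
    ∀ k ∈ (bInit grid (nR grid) (nC grid)).1.keys, Good grid k := by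
  intro k hk
  by_contra hg
  exact (PySem.Dict.get?_eq_none_iff_not_mem_keys _ _).mp ((bInit_spec grid k).2 hg).1 hk

theorem bInit_nodup (grid : List (List String)) (rows cols : Int) :
    (bInit grid rows cols).2.keys.Nodup := by
  unfold bInit
  have gen : ∀ (f : PySem.Dict (Int × Int) (Int × Int) ×
        PySem.Dict (Int × Int) (List (Int × Int)) → Int →
        PySem.Dict (Int × Int) (Int × Int) × PySem.Dict (Int × Int) (List (Int × Int)))
      (hf : ∀ st r, st.2.keys.Nodup → (f st r).2.keys.Nodup)
      (l : List Int) (st : PySem.Dict (Int × Int) (Int × Int) ×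
        PySem.Dict (Int × Int) (List (Int × Int))),
      st.2.keys.Nodup → (l.foldl f st).2.keys.Nodup := by
    intro f hf l
    induction l with
    | nil => exact fun st h => h
    | cons a l ih => exact fun st h => ih _ (hf st a h)
  refine gen _ ?_ _ _ (by simp [PySem.Dict.empty, PySem.Dict.keys])
  intro st r hnd
  refine gen _ ?_ _ _ hnd
  intro st c hnd
  by_cases hcell : cellAt grid r c = "farm" ∨ cellAt grid r c = "water"
  · rw [if_pos hcell]
    exact PySem.Dict.nodup_keys_insert _ _ _ hnd
  · rw [if_neg hcell]
    exact hnd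

-- the union-pass invariant: labels are total on good cells, equal labels = recorded
-- connectivity, and members is exactly the fibre of the label map over its roots
def UInv (grid : List (List String)) (done : List ((Int × Int) × (Int × Int)))
    (st : PySem.Dict (Int × Int) (Int × Int) × PySem.Dict (Int × Int) (List (Int × Int))) : Prop :=
  (∀ x, ¬ Good grid x → st.1.get? x = none) ∧
  (∀ x, Good grid x → ∃ ρ, st.1.get? x = some ρ ∧ Good grid ρ ∧ RelE grid done x ρ) ∧
  (∀ x y, Good grid x → Good grid y →
    (st.1.getD x x = st.1.getD y y ↔ RelE grid done x y)) ∧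
  st.2.keys.Nodup ∧
  (∀ ρ, (∃ l, st.2.get? ρ = some l) ↔ (Good grid ρ ∧ st.1.getD ρ ρ = ρ)) ∧
  (∀ ρ l, st.2.get? ρ = some l → ∀ x, (x ∈ l ↔ (Good grid x ∧ st.1.getD x x = ρ)))

theorem getD_self_of_get? {st : PySem.Dict (Int × Int) (Int × Int)} {x ρ : Int × Int}
    (h : st.get? x = some ρ) : st.getD x x = ρ := by
  simp [PySem.Dict.getD, h]

-- a good cell's label is a good root related to it
theorem lv_root {grid done st} (hU : UInv grid done st) {x : Int × Int} (hgx : Good grid x) :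
    Good grid (st.1.getD x x) ∧ RelE grid done x (st.1.getD x x) ∧
      st.1.getD (st.1.getD x x) (st.1.getD x x) = st.1.getD x x := by
  obtain ⟨ρ, hget, hρg, hrel⟩ := hU.2.1 x hgx
  have hlv : st.1.getD x x = ρ := getD_self_of_get? hget
  rw [hlv]
  refine ⟨hρg, hrel, ?_⟩
  exact ((hU.2.2.1 x ρ hgx hρg).mpr hrel).symm.trans hlv

-- an invariant is preserved verbatim when the recorded relation is unchanged
theorem UInv_relIff {grid done done' st}
    (h : ∀ x y, RelE grid done' x y ↔ RelE grid done x y)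
    (hU : UInv grid done st) : UInv grid done' st := by
  obtain ⟨h1, h2, h3, h4, h5, h6⟩ := hU
  refine ⟨h1, fun x hgx => ?_, fun x y hgx hgy => ?_, h4, h5, h6⟩
  · obtain ⟨ρ, ha, hb, hc⟩ := h2 x hgx
    exact ⟨ρ, ha, hb, (h x ρ).mpr hc⟩
  · rw [h3 x y hgx hgy]
    exact (h x y).symm

-- the merged label function, compared (pure case analysis on two relabelled classes)
theorem ite_merge_iff {α : Type} [DecidableEq α] (a b X Y : α) (hne : a ≠ b) :
    ((if X = b then a else X) = (if Y = b then a else Y)) ↔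
      (X = Y ∨ (X = a ∧ Y = b) ∨ (X = b ∧ Y = a)) := by
  by_cases hX : X = b <;> by_cases hY : Y = b
  · simp [hX, hY]
  · simp only [if_pos hX, if_neg hY]
    constructor
    · intro h
      exact Or.inr (Or.inr ⟨hX, h.symm⟩)
    · rintro (h | ⟨h1, h2⟩ | ⟨h1, h2⟩)
      · exact absurd (h ▸ hX) hY
      · exact absurd h2 hY
      · exact h2.symm
  · simp only [if_neg hX, if_pos hY]
    constructor
    · intro h
      exact Or.inr (Or.inl ⟨h, hY⟩)
    · rintro (h | ⟨h1, h2⟩ | ⟨h1, h2⟩)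
      · exact absurd (h.symm ▸ hY) hX
      · exact h1
      · exact absurd h1 hX
  · simp only [if_neg hX, if_neg hY]
    constructor
    · exact Or.inl
    · rintro (h | ⟨h1, h2⟩ | ⟨h1, h2⟩)
      · exact h
      · exact absurd h2 hY
      · exact absurd h1 hX

-- the heart of the correctness proof: one weighted-quick-find merge records one edge
theorem merge_inv (grid : List (List String)) {done st} (hU : UInv grid done st)
    {p q : Int × Int} (hgp : Good grid p) (hgq : Good grid q)
    (hcell : cellAt grid q.1 q.2 = cellAt grid p.1 p.2) (hnb : q ∈ nbrs4 p.1 p.2)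
    (ra rb : Int × Int)
    (hmem : (ra = st.1.getD p p ∧ rb = st.1.getD q q) ∨
      (ra = st.1.getD q q ∧ rb = st.1.getD p p))
    (hne : ra ≠ rb) :
    UInv grid (done ++ [(p, q)])
      ((st.2.getD rb []).foldl (fun d cell => d.insert cell ra) st.1,
       (st.2.erase rb).modify ra [] (fun l => l ++ st.2.getD rb [])) := by
  obtain ⟨hA, hB, hC, hnd, hD, hE⟩ := hU
  -- roots and member lists of the two merged classes
  have hrootp := lv_root ⟨hA, hB, hC, hnd, hD, hE⟩ hgp
  have hrootq := lv_root ⟨hA, hB, hC, hnd, hD, hE⟩ hgq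
  have hga : Good grid ra ∧ st.1.getD ra ra = ra := by
    rcases hmem with ⟨h1, _⟩ | ⟨h1, _⟩
    · exact h1 ▸ ⟨hrootp.1, hrootp.2.2⟩
    · exact h1 ▸ ⟨hrootq.1, hrootq.2.2⟩
  have hgb : Good grid rb ∧ st.1.getD rb rb = rb := by
    rcases hmem with ⟨_, h1⟩ | ⟨_, h1⟩
    · exact h1 ▸ ⟨hrootq.1, hrootq.2.2⟩
    · exact h1 ▸ ⟨hrootp.1, hrootp.2.2⟩
  obtain ⟨la, hla⟩ := (hD ra).mpr hga
  obtain ⟨lb, hlb⟩ := (hD rb).mpr hgb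
  have hmoved : st.2.getD rb [] = lb := by simp [PySem.Dict.getD, hlb]
  have hmemb : ∀ x, x ∈ lb ↔ (Good grid x ∧ st.1.getD x x = rb) := hE rb lb hlb
  have hmema : ∀ x, x ∈ la ↔ (Good grid x ∧ st.1.getD x x = ra) := hE ra la hla
  -- the new label map
  have hget' : ∀ x, ((st.2.getD rb []).foldl (fun d cell => d.insert cell ra) st.1).get? x
      = if x ∈ lb then some ra else st.1.get? x := by
    intro x
    rw [hmoved, dict_get?_foldl_insert]
  have hnone' : ∀ x, ¬ Good grid x →
      ((st.2.getD rb []).foldl (fun d cell => d.insert cell ra) st.1).get? x = none := by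
    intro x hgx
    rw [hget', if_neg (fun hx => hgx ((hmemb x).mp hx).1)]
    exact hA x hgx
  have hlv' : ∀ x, Good grid x →
      ((st.2.getD rb []).foldl (fun d cell => d.insert cell ra) st.1).getD x x
        = if st.1.getD x x = rb then ra else st.1.getD x x := by
    intro x hgx
    by_cases hx : st.1.getD x x = rb
    · rw [if_pos hx]
      have hin : x ∈ lb := (hmemb x).mpr ⟨hgx, hx⟩
      rw [PySem.Dict.getD_eq_get?_getD, hget' x, if_pos hin]
      rfl
    · rw [if_neg hx]
      have hnin : x ∉ lb := fun hmem' => hx ((hmemb x).mp hmem').2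
      rw [PySem.Dict.getD_eq_get?_getD, hget' x, if_neg hnin, ← PySem.Dict.getD_eq_get?_getD]
  -- the recorded relation, in terms of old labels
  have hiff := fun x y => relE_append_iff (done := done) hgp hgq hcell hnb x y
  have hrelL : ∀ x y, Good grid x → Good grid y →
      (RelE grid (done ++ [(p, q)]) x y ↔
        (st.1.getD x x = st.1.getD y y ∨
          (st.1.getD x x = st.1.getD p p ∧ st.1.getD y y = st.1.getD q q) ∨
          (st.1.getD x x = st.1.getD q q ∧ st.1.getD y y = st.1.getD p p))) := by
    intro x y hgx hgy
    rw [hiff x y]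
    have e1 : RelE grid done x y ↔ st.1.getD x x = st.1.getD y y := (hC x y hgx hgy).symm
    have e2 : RelE grid done x p ↔ st.1.getD x x = st.1.getD p p := (hC x p hgx hgp).symm
    have e3 : RelE grid done q y ↔ st.1.getD y y = st.1.getD q q := by
      constructor
      · intro h
        exact ((hC y q hgy hgq).mpr (relE_symm h))
      · intro h
        exact relE_symm ((hC y q hgy hgq).mp h)
    have e4 : RelE grid done x q ↔ st.1.getD x x = st.1.getD q q := (hC x q hgx hgq).symm
    have e5 : RelE grid done p y ↔ st.1.getD y y = st.1.getD p p := by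
      constructor
      · intro h
        exact ((hC y p hgy hgp).mpr (relE_symm h))
      · intro h
        exact relE_symm ((hC y p hgy hgp).mp h)
    rw [e1, e2, e3, e4, e5]
  -- the merged members map is an insert over an erase
  have hm' : ((st.2.erase rb).modify ra [] (fun l => l ++ st.2.getD rb []))
      = (st.2.erase rb).insert ra (la ++ lb) := by
    have : (st.2.erase rb).getD ra [] = la := by
      simp [PySem.Dict.getD, dict_get?_erase, hne, hla]
    simp [PySem.Dict.modify, this, hmoved]
  have hU' : UInv grid done st := ⟨hA, hB, hC, hnd, hD, hE⟩
  refine ⟨hnone', ?_, ?_, ?_, ?_, ?_⟩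
  · -- every good cell keeps a good related root
    intro x hgx
    by_cases hx : st.1.getD x x = rb
    · refine ⟨ra, ?_, hga.1, ?_⟩
      · rw [hget' x, if_pos ((hmemb x).mpr ⟨hgx, hx⟩)]
      · rw [hrelL x ra hgx hga.1]
        rcases hmem with ⟨h1, h2⟩ | ⟨h1, h2⟩
        · exact Or.inr (Or.inr ⟨by rw [hx, h2], by rw [hga.2, h1]⟩)
        · exact Or.inr (Or.inl ⟨by rw [hx, h2], by rw [hga.2, h1]⟩)
    · obtain ⟨ρ, hρ, hρg, hρrel⟩ := hB x hgx
      refine ⟨ρ, ?_, hρg, relE_mono (fun e he => List.mem_append.mpr (Or.inl he)) hρrel⟩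
      rw [hget' x, if_neg (fun hin => hx ((hmemb x).mp hin).2)]
      exact hρ
  · -- equal labels now mean connectivity with the new edge recorded
    intro x y hgx hgy
    rw [hlv' x hgx, hlv' y hgy, hrelL x y hgx hgy]
    rcases hmem with ⟨h1, h2⟩ | ⟨h1, h2⟩
    · rw [← h1, ← h2, ite_merge_iff _ _ _ _ hne]
    · rw [← h1, ← h2, ite_merge_iff _ _ _ _ hne]
      tauto
  · -- members keys stay unique
    rw [hm']
    refine PySem.Dict.nodup_keys_insert _ _ _ ?_
    have hsub : (st.2.erase rb).keys.Sublist st.2.keys := by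
      simp only [PySem.Dict.erase, PySem.Dict.keys]
      exact List.Sublist.map _ (List.filter_sublist)
    exact hnd.sublist hsub
  · -- members keys are exactly the new roots
    intro ρ
    rw [hm']
    by_cases hρa : ρ = ra
    · subst hρa
      constructor
      · intro _
        refine ⟨hga.1, ?_⟩
        rw [hlv' ρ hga.1, hga.2, if_neg hne]
      · intro _
        exact ⟨la ++ lb, PySem.Dict.get?_insert_self _ _ _⟩
    · rw [show (((st.2.erase rb).insert ra (la ++ lb)).get? ρ) = (st.2.erase rb).get? ρ from
        PySem.Dict.get?_insert_of_ne _ _ hρa, dict_get?_erase]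
      by_cases hρb : ρ = rb
      · rw [if_pos hρb]
        constructor
        · rintro ⟨l, h⟩
          cases h
        · rintro ⟨hgρ, hroot⟩
          subst hρb
          rw [hlv' _ hgρ, if_pos hgb.2] at hroot
          exact absurd hroot hne
      · rw [if_neg hρb, hD ρ]
        constructor
        · rintro ⟨hgρ, hroot⟩
          refine ⟨hgρ, ?_⟩
          rw [hlv' _ hgρ, if_neg (fun hb' => hρb (by rw [← hroot, hb'])), hroot]
        · rintro ⟨hgρ, hroot⟩
          rw [hlv' _ hgρ] at hroot
          by_cases hx : st.1.getD ρ ρ = rb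
          · rw [if_pos hx] at hroot
            exact absurd hroot.symm hρa
          · rw [if_neg hx] at hroot
            exact ⟨hgρ, hroot⟩
  · -- each member list is the fibre of the new label map over its root
    intro ρ l hl x
    rw [hm'] at hl
    by_cases hρa : ρ = ra
    · subst hρa
      rw [PySem.Dict.get?_insert_self] at hl
      injection hl with hl
      subst hl
      rw [List.mem_append, hmema x, hmemb x]
      constructor
      · rintro (⟨hgx, h⟩ | ⟨hgx, h⟩)
        · refine ⟨hgx, ?_⟩
          rw [hlv' x hgx, if_neg (fun hb' => hne (by rw [← h, hb'])), h]
        · exact ⟨hgx, by rw [hlv' x hgx, if_pos h]⟩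
      · rintro ⟨hgx, h⟩
        rw [hlv' x hgx] at h
        by_cases hx : st.1.getD x x = rb
        · exact Or.inr ⟨hgx, hx⟩
        · rw [if_neg hx] at h
          exact Or.inl ⟨hgx, h⟩
    · rw [PySem.Dict.get?_insert_of_ne _ _ hρa, dict_get?_erase] at hl
      by_cases hρb : ρ = rb
      · rw [if_pos hρb] at hl
        cases hl
      · rw [if_neg hρb] at hl
        rw [hE ρ l hl x]
        constructor
        · rintro ⟨hgx, h⟩
          refine ⟨hgx, ?_⟩
          rw [hlv' x hgx, if_neg (fun hb' => hρb (by rw [← h, hb'])), h]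
        · rintro ⟨hgx, h⟩
          rw [hlv' x hgx] at h
          by_cases hx : st.1.getD x x = rb
          · rw [if_pos hx] at h
            exact absurd h.symm hρa
          · rw [if_neg hx] at h
            exact ⟨hgx, h⟩

theorem unionEdge_inv (grid : List (List String)) {done st} (hU : UInv grid done st)
    (p q : Int × Int) (hgp : Good grid p) (hnb : q ∈ nbrs4 p.1 p.2) :
    UInv grid (done ++ [(p, q)]) (unionEdge grid st p q) := by
  have hcontains : st.1.contains q = true ↔ Good grid q := by
    rw [PySem.Dict.contains_eq_isSome_get?]
    constructor
    · intro h
      by_contra hg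
      rw [hU.1 q hg] at h
      cases h
    · intro hg
      obtain ⟨ρ, hρ, _, _⟩ := hU.2.1 q hg
      rw [hρ]
      rfl
  unfold unionEdge
  by_cases hcond : st.1.contains q = true ∧ cellAt grid q.1 q.2 = cellAt grid p.1 p.2
  · rw [if_pos hcond]
    have hgq : Good grid q := hcontains.mp hcond.1
    have hcell := hcond.2
    by_cases hrr : st.1.getD p p = st.1.getD q q
    · rw [if_pos hrr]
      exact UInv_relIff (relE_append_of_rel hgp hgq hcell hnb
        ((hU.2.2.1 p q hgp hgq).mp hrr)) hU
    · rw [if_neg hrr]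
      by_cases hsz : (st.2.getD (st.1.getD p p) []).length <
          (st.2.getD (st.1.getD q q) []).length
      · rw [if_pos hsz]
        exact merge_inv grid hU hgp hgq hcell hnb _ _ (Or.inr ⟨rfl, rfl⟩)
          (fun h => hrr h.symm)
      · rw [if_neg hsz]
        exact merge_inv grid hU hgp hgq hcell hnb _ _ (Or.inl ⟨rfl, rfl⟩) hrr
  · rw [if_neg hcond]
    refine UInv_relIff (fun x y => relE_append_of_not ?_ x y) hU
    rintro ⟨hgq, hcell⟩
    exact hcond ⟨hcontains.mpr hgq, hcell⟩

theorem unionPass_inv (grid : List (List String)) :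
    ∀ (es : List ((Int × Int) × (Int × Int))) (done : List ((Int × Int) × (Int × Int))) st,
    (∀ e ∈ es, Good grid e.1 ∧ e.2 ∈ nbrs4 e.1.1 e.1.2) →
    UInv grid done st →
    UInv grid (done ++ es) (es.foldl (fun st e => unionEdge grid st e.1 e.2) st) := by
  intro es
  induction es with
  | nil =>
    intro done st _ h
    rw [List.append_nil]
    exact h
  | cons e es ih =>
    intro done st hb hU
    simp only [List.foldl_cons]
    have h1 := unionEdge_inv grid hU e.1 e.2 (hb e List.mem_cons_self).1
      (hb e List.mem_cons_self).2
    have h2 := ih (done ++ [e]) _ (fun e' he' => hb e' (List.mem_cons_of_mem _ he')) h1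
    have heq : (done ++ [e]) ++ es = done ++ e :: es := by
      rw [List.append_assoc]
      rfl
    rw [heq] at h2
    exact h2

-- the edges B's union pass records, and the fold over them
def allEdges (ks : List (Int × Int)) : List ((Int × Int) × (Int × Int)) :=
  ks.flatMap fun k => (edgeNbrs k.1 k.2).map (fun q => (k, q))

theorem mem_allEdges {ks : List (Int × Int)} {e : (Int × Int) × (Int × Int)} :
    e ∈ allEdges ks ↔ e.1 ∈ ks ∧ e.2 ∈ edgeNbrs e.1.1 e.1.2 := by
  obtain ⟨p, q⟩ := e
  simp only [allEdges, List.mem_flatMap, List.mem_map]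
  constructor
  · rintro ⟨k, hk, q', hq', heq⟩
    injection heq with h1 h2
    subst h1; subst h2
    exact ⟨hk, hq'⟩
  · rintro ⟨h1, h2⟩
    exact ⟨p, h1, q, h2, rfl⟩

theorem edgeNbrs_sub_nbrs4 {r c : Int} {q : Int × Int} (h : q ∈ edgeNbrs r c) :
    q ∈ nbrs4 r c := by
  simp only [edgeNbrs, List.mem_cons, List.not_mem_nil, or_false] at h
  rcases h with h | h
  · exact h ▸ List.mem_cons_self
  · exact h ▸ List.mem_cons_of_mem _ (List.mem_cons_of_mem _ List.mem_cons_self)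

theorem nested_fold_eq_flat (grid : List (List String)) (ks : List (Int × Int)) :
    ∀ st, ks.foldl (fun st p =>
        (edgeNbrs p.1 p.2).foldl (fun st q => unionEdge grid st p q) st) st
      = (allEdges ks).foldl (fun st e => unionEdge grid st e.1 e.2) st := by
  induction ks with
  | nil => intro st; rfl
  | cons k ks ih =>
    intro st
    rw [List.foldl_cons]
    exact ih _

-- at the start nothing is recorded and every good cell is its own root
theorem bInit_UInv (grid : List (List String)) :
    UInv grid [] (bInit grid (nR grid) (nC grid)) := by
  refine ⟨?_, ?_, ?_, bInit_nodup _ _ _, ?_, ?_⟩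
  · exact fun x hg => ((bInit_spec grid x).2 hg).1
  · exact fun x hg => ⟨x, ((bInit_spec grid x).1 hg).1, hg, Relation.ReflTransGen.refl⟩
  · intro x y hgx hgy
    rw [getD_self_of_get? ((bInit_spec grid x).1 hgx).1,
      getD_self_of_get? ((bInit_spec grid y).1 hgy).1, relE_nil]
  · intro ρ
    constructor
    · rintro ⟨l, hl⟩
      by_cases hg : Good grid ρ
      · exact ⟨hg, getD_self_of_get? ((bInit_spec grid ρ).1 hg).1⟩
      · rw [((bInit_spec grid ρ).2 hg).2] at hl
        cases hl
    · rintro ⟨hg, _⟩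
      exact ⟨[ρ], ((bInit_spec grid ρ).1 hg).2⟩
  · intro ρ l hl x
    by_cases hgρ : Good grid ρ
    · rw [((bInit_spec grid ρ).1 hgρ).2] at hl
      injection hl with hl
      subst hl
      simp only [List.mem_singleton]
      constructor
      · intro h
        subst h
        exact ⟨hgρ, getD_self_of_get? ((bInit_spec grid x).1 hgρ).1⟩
      · rintro ⟨hgx, h⟩
        rw [getD_self_of_get? ((bInit_spec grid x).1 hgx).1] at h
        exact h
    · rw [((bInit_spec grid ρ).2 hgρ).2] at hl
      cases hl

-- over the full edge list, recorded connectivity is exactly same-terrain reachability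
theorem relE_full_iff (grid : List (List String)) (ks : List (Int × Int))
    (hks : ∀ k, k ∈ ks ↔ Good grid k) (x y : Int × Int) (hgx : Good grid x) :
    RelE grid (allEdges ks) x y ↔
      ReachR grid (nR grid) (nC grid) (cellAt grid x.1 x.2) x y := by
  constructor
  · intro h
    induction h with
    | refl => exact Relation.ReflTransGen.refl
    | tail hab hst ih =>
      rename_i b c
      obtain ⟨_, hgb, hgc, hcbc, hnbc⟩ := hst
      refine ih.tail ⟨hnbc, hgc.1, ?_⟩
      rw [hcbc]
      exact reach_cell rfl ih
  · intro h
    induction h with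
    | refl => exact Relation.ReflTransGen.refl
    | tail hab hst ih =>
      rename_i b c
      obtain ⟨hnbc, hinbc, hcellc⟩ := hst
      have hgb : Good grid b := good_of_reach hgx hab
      have hgc : Good grid c := ⟨hinbc, by rw [hcellc]; exact hgx.2⟩
      have hcellbc : cellAt grid c.1 c.2 = cellAt grid b.1 b.2 := by
        rw [hcellc, reach_cell rfl hab]
      refine ih.tail ⟨?_, hgb, hgc, hcellbc, hnbc⟩
      obtain ⟨b1, b2⟩ := b
      simp only [nbrs4, List.mem_cons, List.not_mem_nil, or_false] at hnbc
      rcases hnbc with hc | hc | hc | hc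
      · refine Or.inl (mem_allEdges.mpr ⟨(hks _).mpr hgb, ?_⟩)
        rw [hc]
        exact List.mem_cons_self
      · refine Or.inr (mem_allEdges.mpr ⟨(hks _).mpr hgc, ?_⟩)
        subst hc
        simp only [edgeNbrs, List.mem_cons, Prod.mk.injEq, List.not_mem_nil, or_false]
        exact Or.inl ⟨by omega, trivial⟩
      · refine Or.inl (mem_allEdges.mpr ⟨(hks _).mpr hgb, ?_⟩)
        rw [hc]
        exact List.mem_cons_of_mem _ List.mem_cons_self
      · refine Or.inr (mem_allEdges.mpr ⟨(hks _).mpr hgc, ?_⟩)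
        subst hc
        simp only [edgeNbrs, List.mem_cons, Prod.mk.injEq, List.not_mem_nil, or_false]
        exact Or.inr ⟨trivial, by omega⟩

-- the final union-find state of B's pass
def bState (grid : List (List String)) :
    PySem.Dict (Int × Int) (Int × Int) × PySem.Dict (Int × Int) (List (Int × Int)) :=
  (bInit grid (nR grid) (nC grid)).1.keys.foldl (fun st p =>
    (edgeNbrs p.1 p.2).foldl (fun st q => unionEdge grid st p q) st)
    (bInit grid (nR grid) (nC grid))

theorem bKeys_iff (grid : List (List String)) :
    ∀ k, k ∈ (bInit grid (nR grid) (nC grid)).1.keys ↔ Good grid k := by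
  intro k
  constructor
  · exact bInit_keys_good grid k
  · intro hg
    by_contra hmem
    have := (PySem.Dict.get?_eq_none_iff_not_mem_keys _ k).mpr hmem
    rw [((bInit_spec grid k).1 hg).1] at this
    cases this

theorem bState_UInv (grid : List (List String)) :
    UInv grid (allEdges (bInit grid (nR grid) (nC grid)).1.keys) (bState grid) := by
  unfold bState
  rw [nested_fold_eq_flat]
  have hes : ∀ e ∈ allEdges (bInit grid (nR grid) (nC grid)).1.keys,
      Good grid e.1 ∧ e.2 ∈ nbrs4 e.1.1 e.1.2 := by
    intro e he
    obtain ⟨h1, h2⟩ := mem_allEdges.mp he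
    exact ⟨bInit_keys_good grid _ h1, edgeNbrs_sub_nbrs4 h2⟩
  have := unionPass_inv grid _ [] _ hes (bInit_UInv grid)
  rwa [List.nil_append] at this

-- every stored (root, members) pair is the same-terrain component of its root
theorem bItem_spec (grid : List (List String)) :
    ∀ it ∈ (bState grid).2.items, Good grid it.1 ∧
      (∀ x, x ∈ it.2 ↔
        ReachR grid (nR grid) (nC grid) (cellAt grid it.1.1 it.1.2) it.1 x) := by
  intro it hit
  have hU := bState_UInv grid
  have hget : (bState grid).2.get? it.1 = some it.2 :=
    PySem.Dict.get?_of_mem_items _ hit hU.2.2.2.1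
  have hroot := (hU.2.2.2.2.1 it.1).mp ⟨it.2, hget⟩
  have hE := hU.2.2.2.2.2 it.1 it.2 hget
  refine ⟨hroot.1, fun x => ?_⟩
  rw [hE x]
  constructor
  · rintro ⟨hgx, hlvx⟩
    have hx1 : RelE grid (allEdges (bInit grid (nR grid) (nC grid)).1.keys) x it.1 :=
      (hU.2.2.1 x it.1 hgx hroot.1).mp (by rw [hlvx, hroot.2])
    exact (relE_full_iff grid _ (bKeys_iff grid) it.1 x hroot.1).mp (relE_symm hx1)
  · intro hreach
    have hgx : Good grid x := good_of_reach hroot.1 hreach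
    have h1 : RelE grid (allEdges (bInit grid (nR grid) (nC grid)).1.keys) it.1 x :=
      (relE_full_iff grid _ (bKeys_iff grid) it.1 x hroot.1).mpr hreach
    have h2 := (hU.2.2.1 x it.1 hgx hroot.1).mpr (relE_symm h1)
    exact ⟨hgx, by rw [h2, hroot.2]⟩

-- B's member lists: clusters, pairwise disjoint, covering exactly the good cells
theorem bValues (grid : List (List String)) :
    (∀ l ∈ (bState grid).2.values, IsCluster grid l) ∧
    ((bState grid).2.values.Pairwise Disj) ∧
    (∀ x, (∃ l ∈ (bState grid).2.values, x ∈ l) ↔ Good grid x) := by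
  have hU := bState_UInv grid
  have hnd := hU.2.2.2.1
  refine ⟨?_, ?_, ?_⟩
  · intro l hl
    obtain ⟨it, hit, heq⟩ := List.mem_map.mp hl
    obtain ⟨hg, hmem⟩ := bItem_spec grid it hit
    exact ⟨it.1, hg, heq ▸ hmem⟩
  · have hp : (bState grid).2.items.Pairwise (fun a b => a.1 ≠ b.1) := by
      have h1 : ((bState grid).2.items.map (·.1)).Nodup := hnd
      rw [List.Nodup, List.pairwise_map] at h1
      exact h1
    show ((bState grid).2.items.map (·.2)).Pairwise Disj
    rw [List.pairwise_map]
    refine hp.imp_of_mem (fun {a b} ha hb hne => ?_)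
    intro x hxa hxb
    have hga := (hU.2.2.2.2.2 a.1 a.2 (PySem.Dict.get?_of_mem_items _ ha hnd) x).mp hxa
    have hgb := (hU.2.2.2.2.2 b.1 b.2 (PySem.Dict.get?_of_mem_items _ hb hnd) x).mp hxb
    exact hne (by rw [← hga.2, ← hgb.2])
  · intro x
    constructor
    · rintro ⟨l, hl, hxl⟩
      obtain ⟨it, hit, heq⟩ := List.mem_map.mp hl
      obtain ⟨hg, hmem⟩ := bItem_spec grid it hit
      exact good_of_reach hg ((hmem x).mp (heq ▸ hxl))
    · intro hg
      have hroot := lv_root hU hg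
      obtain ⟨l, hl⟩ := (hU.2.2.2.2.1 ((bState grid).1.getD x x)).mpr ⟨hroot.1, hroot.2.2⟩
      refine ⟨l, ?_, ?_⟩
      · exact List.mem_map.mpr ⟨_,
          (PySem.Dict.get?_eq_some_iff_mem_items _ _ _ hnd).mp hl, rfl⟩
      · exact ((hU.2.2.2.2.2 _ l hl) x).mpr ⟨hg, rfl⟩

-- A's cluster lists: clusters covering exactly the good cells
theorem aClusters (grid : List (List String)) :
    (∀ cl ∈ (scanA grid).2.1 ++ (scanA grid).2.2, IsCluster grid cl) ∧
    (∀ x, (∃ cl ∈ (scanA grid).2.1 ++ (scanA grid).2.2, x ∈ cl) ↔ Good grid x) := by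
  obtain ⟨hInv, hcov⟩ := scanA_inv grid
  constructor
  · intro cl hcl
    rcases List.mem_append.mp hcl with h | h
    · obtain ⟨p, hp, hpt, hiff⟩ := hInv.2.1 cl h
      exact ⟨p, hp, fun x => by rw [hiff x, hpt]⟩
    · obtain ⟨p, hp, hpt, hiff⟩ := hInv.2.2.1 cl h
      exact ⟨p, hp, fun x => by rw [hiff x, hpt]⟩
  · intro x
    constructor
    · rintro ⟨cl, hcl, hxcl⟩
      rcases List.mem_append.mp hcl with h | h
      · obtain ⟨p, hp, hpt, hiff⟩ := hInv.2.1 cl h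
        exact good_of_reach hp (hpt ▸ (hiff x).mp hxcl)
      · obtain ⟨p, hp, hpt, hiff⟩ := hInv.2.2.1 cl h
        exact good_of_reach hp (hpt ▸ (hiff x).mp hxcl)
    · intro hg
      exact (hInv.1 x).mp (hcov x hg)

-- the two返回 values, as counts over the two cluster covers
theorem A_count (grid : List (List String)) :
    shoresideExpanse grid =
      (((scanA grid).2.1.countP
          (fun cl => isIsolated grid (nR grid) (nC grid) cl "water") : Int) +
       ((scanA grid).2.2.countP
          (fun cl => isIsolated grid (nR grid) (nC grid) cl "farm") : Int)) * 3 := by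
  unfold shoresideExpanse
  show ((scanA grid).2.2.foldl (fun cnt cl =>
      if isIsolated grid (nR grid) (nC grid) cl "farm" then cnt + 1 else cnt)
    ((scanA grid).2.1.foldl (fun cnt cl =>
      if isIsolated grid (nR grid) (nC grid) cl "water" then cnt + 1 else cnt) 0)) * 3 = _
  rw [PySem.List.foldl_count_if, PySem.List.foldl_count_if]
  push_cast
  ring

theorem B_count (grid : List (List String)) :
    shoresideExpanse_alt grid =
      ((bState grid).2.items.countP (fun it =>
        it.2.all (fun p => (nbrs4 p.1 p.2).all fun q =>
          inb (nR grid) (nC grid) q &&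
            decide (cellAt grid q.1 q.2 ≠
              (if cellAt grid it.1.1 it.1.2 = "water" then "farm" else "water")))) : Int) * 3 := by
  have hcols : (if grid = [] then (0 : Int)
      else ((PySem.List.pyGetD grid 0 []).length : Int)) = nC grid := by
    cases grid with
    | nil => rfl
    | cons a l => rw [if_neg (by simp)]; rfl
  unfold shoresideExpanse_alt
  rw [hcols]
  dsimp only
  show ((bState grid).2.items.foldl (fun cnt it =>
      if it.2.all (fun p => (nbrs4 p.1 p.2).all fun q =>
          inb (nR grid) (nC grid) q &&
            decide (cellAt grid q.1 q.2 ≠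
              (if cellAt grid it.1.1 it.1.2 = "water" then "farm" else "water")))
        then cnt + 1 else cnt) (0 : Int)) * 3 = _
  rw [PySem.List.foldl_count_if]
  push_cast
  ring

-- ===== VERDICT (by name: the statement is the Claim_ definition above) =====
theorem shoresideExpanse_spec : Claim_equal_shoresideExpanse := by
  intro grid _hdom _hpre
  show shoresideExpanse grid = shoresideExpanse_alt grid
  rw [A_count, B_count]
  obtain ⟨hIsA, hCovA⟩ := aClusters grid
  obtain ⟨hIsB, hPwB, hCovB⟩ := bValues grid
  obtain ⟨hInv, _⟩ := scanA_inv grid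
  have hF : (scanA grid).2.1.countP (fun cl => isIsolated grid (nR grid) (nC grid) cl "water")
      = (scanA grid).2.1.countP (PIso grid) := by
    refine List.countP_congr (fun cl hcl => ?_)
    obtain ⟨p, hp, hpt, hiff⟩ := hInv.2.1 cl hcl
    have hcells : ∀ y ∈ cl, cellAt grid y.1 y.2 = "farm" :=
      fun y hy => reach_cell hpt ((hiff y).mp hy)
    have heq := piso_eq_isIsolated (grid := grid) hcells
    rw [show oppOf "farm" = "water" from rfl] at heq
    rw [heq]
  have hW : (scanA grid).2.2.countP (fun cl => isIsolated grid (nR grid) (nC grid) cl "farm")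
      = (scanA grid).2.2.countP (PIso grid) := by
    refine List.countP_congr (fun cl hcl => ?_)
    obtain ⟨p, hp, hpt, hiff⟩ := hInv.2.2.1 cl hcl
    have hcells : ∀ y ∈ cl, cellAt grid y.1 y.2 = "water" :=
      fun y hy => reach_cell hpt ((hiff y).mp hy)
    have heq := piso_eq_isIsolated (grid := grid) hcells
    rw [show oppOf "water" = "farm" from rfl] at heq
    rw [heq]
  have hB : (bState grid).2.items.countP (fun it =>
        it.2.all (fun p => (nbrs4 p.1 p.2).all fun q =>
          inb (nR grid) (nC grid) q &&
            decide (cellAt grid q.1 q.2 ≠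
              (if cellAt grid it.1.1 it.1.2 = "water" then "farm" else "water"))))
      = (bState grid).2.items.countP (fun it => PIso grid it.2) := by
    refine List.countP_congr (fun it hit => ?_)
    obtain ⟨hg, hmem⟩ := bItem_spec grid it hit
    have hcells : ∀ y ∈ it.2, cellAt grid y.1 y.2 = cellAt grid it.1.1 it.1.2 :=
      fun y hy => reach_cell rfl ((hmem y).mp hy)
    have heq := piso_eq_isIsolated (grid := grid) hcells
    rw [heq]
    exact Iff.rfl
  have htrans : ((scanA grid).2.1 ++ (scanA grid).2.2).countP (PIso grid)
      = (bState grid).2.values.countP (PIso grid) := by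
    refine count_transfer grid (PIso grid) (fun cl cl' h => piso_respects_mem h)
      _ _ hIsA hIsB hInv.2.2.2 hPwB ?_
    intro x
    rw [hCovA x, hCovB x]
  have hmap : (bState grid).2.values.countP (PIso grid)
      = (bState grid).2.items.countP (fun it => PIso grid it.2) := by
    show (((bState grid).2.items.map (·.2)).countP (PIso grid)) = _
    rw [List.countP_map]
    rfl
  have hkey : (scanA grid).2.1.countP (fun cl => isIsolated grid (nR grid) (nC grid) cl "water")
      + (scanA grid).2.2.countP (fun cl => isIsolated grid (nR grid) (nC grid) cl "farm")
      = (bState grid).2.items.countP (fun it =>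
          it.2.all (fun p => (nbrs4 p.1 p.2).all fun q =>
            inb (nR grid) (nC grid) q &&
              decide (cellAt grid q.1 q.2 ≠
                (if cellAt grid it.1.1 it.1.2 = "water" then "farm" else "water")))) := by
    rw [hF, hW, hB, ← List.countP_append, htrans, hmap]
  push_cast
  omega
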